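/-
  THE SPLIT OF `compute_codewords` (145 instructions, 0x1081a0 … 0x1083ea; stb_vorbis_fixed.c `compute_codewords`) INTO NINE SEGMENTS.

  The function's contract `Vorbis.Spec.compute_codewords.spec` is in Vorbis/Spec/Codebook.lean. The function has a PROTECTED FRAME
  (`available[32]`, `Vorbis.Frames.compute_codewords`): its prologue poisons the red zones of the frame in the shadow (0x1081f0,
  0x1081fa), its epilogue clears them (0x1083b3, 0x1083be). This file holds
    PART 1: the protected frame as pure lemmas (`cw_frame_pushed`, `cw_frame_popped`, `cw_check_available`), the memory after the prologue
            (`cw_prologueMem`, `cw_poisonedMem`), what every cut point of the body shares (`CwBody`, `CwBody.carry`, `CwBody.carry2`), the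
            32-bit and address facts of the walks (`cw_idx_addr`, `cw_avail_addr`, `cw_len_byte` …);
    PART 2: the assertions at the cut points, all relative to the function's entry state `u`:
            `CwAt` (entry + precondition + `CwBody`) ⊂ `At1` (0x108218 = `cut1`), `AtFirst k` (0x108257 = `chk2`), `At3 k` (0x10827c =
            `cut3`), `AtMain i` (0x108345 = `cut8`, the head of the main loop), `AtLen i` (0x10835c = `chk6`), `AtScan i` (0x1082c5 =
            `cut5`), `AtRes i z` (0x1082ee = `chk5`), `AtProp i z` (0x108373 = `cut9`);
    PART 3: the claims `Seg1 … Seg9` of the units `compute_codewords.1 … .9`. The four small loops (1120, 1126, 1143, 1150) lie INSIDE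
            one segment each (their induction is the segment's); the MAIN loop 1132 is cut into segments 5 – 9, each ONE pass from
            one cut point to the next; the induction on `n − i` is the composition's (unit `compute_codewords.COMPOSITION`).

  The stack frame (steady `rsp` = entry `rsp − 296`: six pushes and `sub rsp, F8H`), offsets from the ENTRY rsp:
    −296 `[rsp]` scratch      −288 `[rsp+8]` len      −280 `[rsp+10H]` n (4 bytes)      −276 `[rsp+14H]` m + 1 (4 bytes, main loop)
    −272 `[rsp+18H]` c        −264 `[rsp+20H]` values −256 `[rsp+28H]` the shadow index `(rsp₀ − 248) >>> 3` (saved r15, 0x1082b8)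
    −248 … −56 the protected frame (`available` = `[rsp₀ − 216, rsp₀ − 88)` = `[rsp+50H …)`)
    −48 … −8 the saved rbx rbp r12 r13 r14 r15      0 the return address.
-/
import Asan.CheckWalk
import Vorbis.Spec.Codebook
import Vorbis.LabelsAt

open X86 X86.User Asan Vorbis Vorbis.Spec

set_option maxRecDepth 4000
set_option maxHeartbeats 4000000

namespace Vorbis.Spec.compute_codewords

/-! ### PART 1. The protected frame, the body assertion `CwBody`, the arithmetic of the walks (from the worker of `compute_codewords`) -/

/-- The same store into two memories that agree on `[lo, hi)` gives memories that agree on `[lo, hi)`. -/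
theorem cw_eqOn_writeLE_congr {lo hi : Nat} {m m' : Mem} (h : Mem.EqOn lo hi m m') (a : Word) (k v : Nat)
    (hk : a.toNat + k < 2 ^ 64) : Mem.EqOn lo hi (m.writeLE a k v) (m'.writeLE a k v) := by
  intro b h1 h2
  by_cases hin : a.toNat ≤ b.toNat ∧ b.toNat < a.toNat + k
  · have hw : Mem.NoWrap a k := by
      unfold Mem.NoWrap
      omega
    have e : b = a + UInt64.ofNat (b.toNat - a.toNat) := by
      apply UInt64.toNat_inj.mp
      rw [hw.toNat_add _ (by omega)]
      omega
    rw [e, Mem.read_writeLE_in _ _ _ _ (by omega) _ (by omega), Mem.read_writeLE_in _ _ _ _ (by omega) _ (by omega)]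
  · have hw : Mem.NoWrap a k := by
      unfold Mem.NoWrap
      omega
    rw [Mem.read_writeLE_disjoint_noWrap _ _ _ _ _ hw (by omega), Mem.read_writeLE_disjoint_noWrap _ _ _ _ _ hw (by omega)]
    exact h b h1 h2

/-- The address of the prologue's / epilogue's shadow store at index `i` of the frame, as the walker builds it
(`lea rax, [rsp + 30H] ; shr rax, 3 ; mov [rax + C00000H + i], imm32`), is the shadow address of granule `base / 8 + i`. -/
theorem cw_shadow_store_addr (sp : Word) (i : Nat) (hi : i < 24) (hlo : 0x700000 + 304 ≤ sp.toNat) (hhi : sp.toNat + 8 ≤ 0x800000) :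
    (sp - 248) >>> 3 + UInt64.ofNat (12582912 + i) = shadowAddr ((sp.toNat - 248) / 8 + i) := by
  apply eq_shadowAddr
  have e1 : (sp - 248).toNat = sp.toNat - 248 := by
    have hle : (248 : UInt64) ≤ sp := by
      rw [UInt64.le_iff_toNat_le]
      have : (248 : UInt64).toNat = 248 := by decide
      omega
    rw [UInt64.toNat_sub_of_le _ _ hle]
    rfl
  rw [UInt64.toNat_add, toNat_shr3, e1, UInt64.toNat_ofNat']
  omega

/-- The prologue's two shadow stores, as a nest of `writeLE`. -/
theorem cw_stores_prologue (mem : Mem) (g : Nat) :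
    storesMem mem g Vorbis.Frames.compute_codewords.prologue =
      (mem.writeLE (shadowAddr (g + 0)) 4 0xf1f1f1f1).writeLE (shadowAddr (g + 20)) 4 0xf3f3f3f3 := by
  unfold storesMem Vorbis.Frames.compute_codewords
  simp only [List.foldl_cons, List.foldl_nil]

/-- The epilogue's two shadow stores, as a nest of `writeLE`. -/
theorem cw_stores_epilogue (mem : Mem) (g : Nat) :
    storesMem mem g Vorbis.Frames.compute_codewords.epilogue =
      (mem.writeLE (shadowAddr (g + 0)) 4 0).writeLE (shadowAddr (g + 20)) 4 0 := by
  unfold storesMem Vorbis.Frames.compute_codewords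
  simp only [List.foldl_cons, List.foldl_nil]

/-- **AFTER THE PROLOGUE** (0x1081f0, 0x1081fa): the shadow layer holds with the frame of `compute_codewords` pushed, for the body's
stack pointer `rsp₀ − 296`. `N` is the memory before the two shadow stores (the entry memory and stack stores: `hN` by
`v_untouched`). This is the `ShadowInv` of the callees' `ShadowPre` (memset, add_entry, bit_reverse are entered with
`rsp = rsp₀ − 304`, so `rsp + 8` is the `top` here) and of the four check sites in `available`. -/
theorem cw_frame_pushed {others : List Obj} {frames : List (Nat × FrameLayout)} {mem N : Mem} (sp : Word)
    (hinv : ShadowInv others frames (sp.toNat + 8) mem) (h8 : sp.toNat % 8 = 0) (hlo : 0x700000 + 304 ≤ sp.toNat)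
    (hhi : sp.toNat + 8 ≤ 0x800000) (hN : ShadowUntouched mem N) :
    ShadowInv others ((sp.toNat - 248, Vorbis.Frames.compute_codewords) :: frames) (sp.toNat - 296)
      ((N.writeLE ((sp - 248) >>> 3 + 12582912) 4 4059165169).writeLE ((sp - 248) >>> 3 + 12582932) 4 4092851187) := by
  have hP := hinv.prologue_ra (top' := sp.toNat - 296) Vorbis.Frames.compute_codewords_ok h8
    (by show sp.toNat - 296 ≤ sp.toNat - 248; omega) (by omega) (by omega)
  refine hP.untouched ?_
  have e1 : (sp - 248) >>> 3 + 12582912 = shadowAddr ((sp.toNat - 248) / 8 + 0) :=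
    cw_shadow_store_addr sp 0 (by decide) hlo hhi
  have e2 : (sp - 248) >>> 3 + 12582932 = shadowAddr ((sp.toNat - 248) / 8 + 20) :=
    cw_shadow_store_addr sp 20 (by decide) hlo hhi
  rw [e1, e2]
  have e3 : (sp.toNat - Vorbis.Frames.compute_codewords.raOff) / 8 = (sp.toNat - 248) / 8 := rfl
  rw [e3, cw_stores_prologue]
  unfold ShadowUntouched
  refine cw_eqOn_writeLE_congr (cw_eqOn_writeLE_congr hN _ _ _ ?_) _ _ _ ?_
  · rw [shadowAddr_toNat _ (by omega)]
    omega
  · rw [shadowAddr_toNat _ (by omega)]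
    omega

/-- **AFTER THE EPILOGUE** (0x1083b3, 0x1083be): the NET effect of the function on the shadow is nil. `mem` is the entry memory, whose
stack below `rsp₀ + 8` is clean (`StackOK.clean` of the precondition); `N` the memory before the prologue's shadow stores; `S` the
memory before the epilogue's stores, which has the shadow the prologue left (`hb`: the body wrote no shadow byte). -/
theorem cw_frame_popped {mem N S : Mem} (sp : Word) (hclean : Clean mem 0x700000 (sp.toNat + 8)) (hlo : 0x700000 + 304 ≤ sp.toNat)
    (hhi : sp.toNat + 8 ≤ 0x800000) (hN : ShadowUntouched mem N)
    (hb : ShadowUntouched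
      ((N.writeLE ((sp - 248) >>> 3 + 12582912) 4 4059165169).writeLE ((sp - 248) >>> 3 + 12582932) 4 4092851187) S) :
    ShadowUntouched mem ((S.writeLE ((sp - 248) >>> 3 + 12582912) 4 0).writeLE ((sp - 248) >>> 3 + 12582932) 4 0) := by
  have e1 : (sp - 248) >>> 3 + 12582912 = shadowAddr ((sp.toNat - 248) / 8 + 0) :=
    cw_shadow_store_addr sp 0 (by decide) hlo hhi
  have e2 : (sp - 248) >>> 3 + 12582932 = shadowAddr ((sp.toNat - 248) / 8 + 20) :=
    cw_shadow_store_addr sp 20 (by decide) hlo hhi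
  rw [e1, e2] at hb
  rw [e1, e2]
  intro a h1 h2
  have ea : a = shadowAddr (a.toNat - 0xC00000) := eq_shadowAddr a _ (by omega)
  have hg : a.toNat - 0xC00000 < 0x200000 := by omega
  generalize a.toNat - 0xC00000 = g' at ea hg
  subst ea
  apply UInt8.toNat_inj.mp
  show shadowOf _ g' = shadowOf mem g'
  have hS := shadowOf_eqOn hb g' hg
  have hN' := shadowOf_eqOn hN g' hg
  rw [shadowOf_writeLE _ _ _ _ _ (by omega) hg, shadowOf_writeLE _ _ _ _ _ (by omega) hg] at hS
  rw [shadowOf_writeLE _ _ _ _ _ (by omega) hg, shadowOf_writeLE _ _ _ _ _ (by omega) hg]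
  by_cases c2 : (sp.toNat - 248) / 8 + 20 ≤ g' ∧ g' < (sp.toNat - 248) / 8 + 20 + 4
  · rw [if_pos c2]
    have := hclean g' (by omega) (by omega)
    rw [this]
    rw [Nat.zero_div]
  · rw [if_neg c2]
    rw [if_neg c2] at hS
    by_cases c1 : (sp.toNat - 248) / 8 + 0 ≤ g' ∧ g' < (sp.toNat - 248) / 8 + 0 + 4
    · rw [if_pos c1]
      have := hclean g' (by omega) (by omega)
      rw [this]
      rw [Nat.zero_div]
    · rw [if_neg c1]
      rw [if_neg c1] at hS
      rw [hS, hN']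

/-- The object `available` (128 bytes at `base + 32`, `base = rsp₀ − 248`) is a live object once the frame is pushed. -/
theorem cw_available_mem (base : Nat) (frames : List (Nat × FrameLayout)) (others : List Obj) :
    (⟨base + 32, 128, .stack⟩ : Obj) ∈ stackObjs ((base, Vorbis.Frames.compute_codewords) :: frames) ++ others := by
  rw [stackObjs_cons]
  apply List.mem_append_left
  apply List.mem_append_left
  unfold FrameLayout.objsAt Vorbis.Frames.compute_codewords
  simp only [List.map_cons, List.map_nil, List.mem_singleton]

/-- The live objects of the caller stay live objects with the frame pushed. -/
theorem cw_objs_mono (base : Nat) (F : FrameLayout) (frames : List (Nat × FrameLayout)) (others : List Obj) (o : Obj)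
    (h : o ∈ stackObjs frames ++ others) : o ∈ stackObjs ((base, F) :: frames) ++ others := by
  rw [stackObjs_cons, List.append_assoc]
  exact List.mem_append_right _ h

/-- The allocated blocks stay live with the frame pushed (`BlkLive` for the callees' live set). -/
theorem cw_blkLive_pushed {Blk : Block → Prop} {others : List Obj} {frames : List (Nat × FrameLayout)} (base : Nat) (F : FrameLayout)
    (h : BlkLive Blk (Live (stackObjs frames ++ others))) :
    BlkLive Blk (Live (stackObjs ((base, F) :: frames) ++ others)) := by
  refine h.mono ?_
  intro x hx
  obtain ⟨o, ho, hb⟩ := hx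
  exact ⟨o, cw_objs_mono base F frames others o ho, hb⟩

/-- **A check site in `available`** (0x108299, 0x1082d1, 0x1082ee, 0x108392): the word `available[z]`, `z ≤ 31`, at
`rsp₀ − 216 + 4z` passes the 4-byte check in any memory `S` that has the shadow the prologue left. `hinv` is `cw_frame_pushed`. -/
theorem cw_check_available {others : List Obj} {frames : List (Nat × FrameLayout)} {top : Nat} {M S : Mem} (sp : Nat)
    (hinv : ShadowInv others ((sp - 248, Vorbis.Frames.compute_codewords) :: frames) top M) (hb : ShadowUntouched M S)
    (hsp : 248 ≤ sp) (b : Word) (z : Nat) (hz : z ≤ 31) (hbz : b.toNat = sp - 216 + 4 * z) : AccSmall 4 S b := by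
  refine Vorbis.check_small hinv hb (cw_available_mem (sp - 248) frames others) (by decide) ?_ ?_
  · show sp - 248 + 32 ≤ b.toNat
    omega
  · show b.toNat + 4 ≤ sp - 248 + 32 + 128
    omega

/-- The memory after the prologue's stack stores (six pushes, the four argument spills, the three header words of the protected
frame), BEFORE its two shadow stores: the `N` of `cw_frame_pushed` / `cw_frame_popped`. -/
def cw_prologueMem (u : State) : Mem :=
  (((((((((((((u.mem.writeLE (u.reg Reg.rsp - 8) 8 (UInt64.toNat (u.reg Reg.r15))).writeLE (u.reg Reg.rsp - 16) 8
        (UInt64.toNat (u.reg Reg.r14))).writeLE (u.reg Reg.rsp - 24) 8 (UInt64.toNat (u.reg Reg.r13))).writeLE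
        (u.reg Reg.rsp - 32) 8 (UInt64.toNat (u.reg Reg.r12))).writeLE (u.reg Reg.rsp - 40) 8 (UInt64.toNat (u.reg Reg.rbp))).writeLE
        (u.reg Reg.rsp - 48) 8 (UInt64.toNat (u.reg Reg.rbx))).writeLE (u.reg Reg.rsp - 272) 8 (UInt64.toNat (u.reg Reg.rdi))).writeLE
        (u.reg Reg.rsp - 288) 8 (UInt64.toNat (u.reg Reg.rsi))).writeLE (u.reg Reg.rsp - 280) 4 (Word.part Width.w32 (u.reg Reg.rdx)).toNat).writeLE
        (u.reg Reg.rsp - 264) 8 (UInt64.toNat (u.reg Reg.rcx))).writeLE (u.reg Reg.rsp - 248) 8 1102416563).writeLE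
        (u.reg Reg.rsp - 240) 8 1182464).writeLE (u.reg Reg.rsp - 232) 8 1081760)

/-- The memory right after the prologue's two shadow stores (0x1081fa): the memory whose shadow every state of the body has. -/
def cw_poisonedMem (u : State) : Mem :=
  ((cw_prologueMem u).writeLE ((u.reg .rsp - 248) >>> 3 + 12582912) 4 4059165169).writeLE
    ((u.reg .rsp - 248) >>> 3 + 12582932) 4 4092851187

/-- **What every cut point of the body of `compute_codewords` shares** (`u` the entry state, `s` the state at the cut, `ws` the
data windows written so far): the steady stack pointer, the code, DF / MXCSR, the footprint so far, the shadow as the prologue left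
it, and the stack slots: the return address, the six saved registers, `len` `c` `values` `n`. -/
structure CwBody (u₀ u : State) (ret : Word) (ws : List Span) (s : State) : Prop where
  rsp : s.reg .rsp = u.reg .rsp - 296
  code : Mem.EqOn Vorbis.L.textLo Vorbis.L.textHi u₀.mem s.mem
  df : s.flags .df = false
  mx : s.mxcsr &&& 0x1F80 = 0x1F80
  same : Mem.SameExcept (⟨(u.reg .rsp).toNat - 400, (u.reg .rsp).toNat⟩ ::
      ⟨0xC00000 + ((u.reg .rsp).toNat - 248) / 8, 0xC00000 + ((u.reg .rsp).toNat - 248) / 8 + 24⟩ :: ws) u.mem s.mem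
  shadow : ShadowUntouched (cw_poisonedMem u) s.mem
  s0 : UInt64.ofNat (s.mem.readLE (u.reg .rsp) 8) = ret
  s1 : UInt64.ofNat (s.mem.readLE (u.reg .rsp - 8) 8) = u.reg .r15
  s2 : UInt64.ofNat (s.mem.readLE (u.reg .rsp - 16) 8) = u.reg .r14
  s3 : UInt64.ofNat (s.mem.readLE (u.reg .rsp - 24) 8) = u.reg .r13
  s4 : UInt64.ofNat (s.mem.readLE (u.reg .rsp - 32) 8) = u.reg .r12
  s5 : UInt64.ofNat (s.mem.readLE (u.reg .rsp - 40) 8) = u.reg .rbp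
  s6 : UInt64.ofNat (s.mem.readLE (u.reg .rsp - 48) 8) = u.reg .rbx
  sLen : UInt64.ofNat (s.mem.readLE (u.reg .rsp - 288) 8) = u.reg .rsi
  sC : UInt64.ofNat (s.mem.readLE (u.reg .rsp - 272) 8) = u.reg .rdi
  sVal : UInt64.ofNat (s.mem.readLE (u.reg .rsp - 264) 8) = u.reg .rcx
  sN : s.mem.readLE (u.reg .rsp - 280) 4 = (Word.part Width.w32 (u.reg .rdx)).toNat % 256 ^ 4

/-- Reading a slot through memories that agree on one of two ranges. -/
theorem cw_slot_carry {μ ν : Mem} {lo1 hi1 lo2 hi2 : Nat} (h1 : Mem.EqOn lo1 hi1 μ ν) (h2 : Mem.EqOn lo2 hi2 μ ν) (a : Word) (k : Nat)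
    (hk : a.toNat + k < 2 ^ 64)
    (hin : (lo1 ≤ a.toNat ∧ a.toNat + k ≤ hi1) ∨ (lo2 ≤ a.toNat ∧ a.toNat + k ≤ hi2)) : ν.readLE a k = μ.readLE a k := by
  rcases hin with ⟨p, q⟩ | ⟨p, q⟩
  · exact h1.readLE a k p q hk
  · exact h2.readLE a k p q hk

/-- The slot `[rsp₀ − 8]` after the prologue's stack stores holds `r15` of the entry state. -/
theorem cw_prologue_slot1 (u : State) (h1 : 0x700000 + 400 ≤ (u.reg .rsp).toNat) (h2 : (u.reg .rsp).toNat + 8 ≤ 0x800000) :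
    UInt64.ofNat ((cw_prologueMem u).readLE (u.reg .rsp - 8) 8) = u.reg .r15 := by
  have h : (cw_prologueMem u).readLE (u.reg .rsp - 8) 8 = (u.reg .r15).toNat := by
    unfold cw_prologueMem
    u_read
  rw [h]
  exact UInt64.ofNat_toNat

/-- The slot `[rsp₀ − 16]` after the prologue's stack stores holds `r14` of the entry state. -/
theorem cw_prologue_slot2 (u : State) (h1 : 0x700000 + 400 ≤ (u.reg .rsp).toNat) (h2 : (u.reg .rsp).toNat + 8 ≤ 0x800000) :
    UInt64.ofNat ((cw_prologueMem u).readLE (u.reg .rsp - 16) 8) = u.reg .r14 := by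
  have h : (cw_prologueMem u).readLE (u.reg .rsp - 16) 8 = (u.reg .r14).toNat := by
    unfold cw_prologueMem
    u_read
  rw [h]
  exact UInt64.ofNat_toNat

/-- The slot `[rsp₀ − 24]` after the prologue's stack stores holds `r13` of the entry state. -/
theorem cw_prologue_slot3 (u : State) (h1 : 0x700000 + 400 ≤ (u.reg .rsp).toNat) (h2 : (u.reg .rsp).toNat + 8 ≤ 0x800000) :
    UInt64.ofNat ((cw_prologueMem u).readLE (u.reg .rsp - 24) 8) = u.reg .r13 := by
  have h : (cw_prologueMem u).readLE (u.reg .rsp - 24) 8 = (u.reg .r13).toNat := by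
    unfold cw_prologueMem
    u_read
  rw [h]
  exact UInt64.ofNat_toNat

/-- The slot `[rsp₀ − 32]` after the prologue's stack stores holds `r12` of the entry state. -/
theorem cw_prologue_slot4 (u : State) (h1 : 0x700000 + 400 ≤ (u.reg .rsp).toNat) (h2 : (u.reg .rsp).toNat + 8 ≤ 0x800000) :
    UInt64.ofNat ((cw_prologueMem u).readLE (u.reg .rsp - 32) 8) = u.reg .r12 := by
  have h : (cw_prologueMem u).readLE (u.reg .rsp - 32) 8 = (u.reg .r12).toNat := by
    unfold cw_prologueMem
    u_read
  rw [h]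
  exact UInt64.ofNat_toNat

/-- The slot `[rsp₀ − 40]` after the prologue's stack stores holds `rbp` of the entry state. -/
theorem cw_prologue_slot5 (u : State) (h1 : 0x700000 + 400 ≤ (u.reg .rsp).toNat) (h2 : (u.reg .rsp).toNat + 8 ≤ 0x800000) :
    UInt64.ofNat ((cw_prologueMem u).readLE (u.reg .rsp - 40) 8) = u.reg .rbp := by
  have h : (cw_prologueMem u).readLE (u.reg .rsp - 40) 8 = (u.reg .rbp).toNat := by
    unfold cw_prologueMem
    u_read
  rw [h]
  exact UInt64.ofNat_toNat

/-- The slot `[rsp₀ − 48]` after the prologue's stack stores holds `rbx` of the entry state. -/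
theorem cw_prologue_slot6 (u : State) (h1 : 0x700000 + 400 ≤ (u.reg .rsp).toNat) (h2 : (u.reg .rsp).toNat + 8 ≤ 0x800000) :
    UInt64.ofNat ((cw_prologueMem u).readLE (u.reg .rsp - 48) 8) = u.reg .rbx := by
  have h : (cw_prologueMem u).readLE (u.reg .rsp - 48) 8 = (u.reg .rbx).toNat := by
    unfold cw_prologueMem
    u_read
  rw [h]
  exact UInt64.ofNat_toNat

/-- The slot `[rsp₀ − 288]` after the prologue's stack stores holds `rsi` of the entry state. -/
theorem cw_prologue_slotLen (u : State) (h1 : 0x700000 + 400 ≤ (u.reg .rsp).toNat) (h2 : (u.reg .rsp).toNat + 8 ≤ 0x800000) :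
    UInt64.ofNat ((cw_prologueMem u).readLE (u.reg .rsp - 288) 8) = u.reg .rsi := by
  have h : (cw_prologueMem u).readLE (u.reg .rsp - 288) 8 = (u.reg .rsi).toNat := by
    unfold cw_prologueMem
    u_read
  rw [h]
  exact UInt64.ofNat_toNat

/-- The slot `[rsp₀ − 272]` after the prologue's stack stores holds `rdi` of the entry state. -/
theorem cw_prologue_slotC (u : State) (h1 : 0x700000 + 400 ≤ (u.reg .rsp).toNat) (h2 : (u.reg .rsp).toNat + 8 ≤ 0x800000) :
    UInt64.ofNat ((cw_prologueMem u).readLE (u.reg .rsp - 272) 8) = u.reg .rdi := by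
  have h : (cw_prologueMem u).readLE (u.reg .rsp - 272) 8 = (u.reg .rdi).toNat := by
    unfold cw_prologueMem
    u_read
  rw [h]
  exact UInt64.ofNat_toNat

/-- The slot `[rsp₀ − 264]` after the prologue's stack stores holds `rcx` of the entry state. -/
theorem cw_prologue_slotVal (u : State) (h1 : 0x700000 + 400 ≤ (u.reg .rsp).toNat) (h2 : (u.reg .rsp).toNat + 8 ≤ 0x800000) :
    UInt64.ofNat ((cw_prologueMem u).readLE (u.reg .rsp - 264) 8) = u.reg .rcx := by
  have h : (cw_prologueMem u).readLE (u.reg .rsp - 264) 8 = (u.reg .rcx).toNat := by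
    unfold cw_prologueMem
    u_read
  rw [h]
  exact UInt64.ofNat_toNat

/-- The slot `[rsp₀ − 280]` (4 bytes) after the prologue's stack stores holds `n`, the low half of rdx. -/
theorem cw_prologue_slotN (u : State) (h1 : 0x700000 + 400 ≤ (u.reg .rsp).toNat) (h2 : (u.reg .rsp).toNat + 8 ≤ 0x800000) :
    (cw_prologueMem u).readLE (u.reg .rsp - 280) 4 = (Word.part Width.w32 (u.reg .rdx)).toNat % 256 ^ 4 := by
  unfold cw_prologueMem
  u_read

/-- The return address is still at `[rsp₀]` after the prologue's stack stores. -/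
theorem cw_prologue_slot0 (u : State) (ret : Word) (h0 : UInt64.ofNat (u.mem.readLE (u.reg .rsp) 8) = ret)
    (h1 : 0x700000 + 400 ≤ (u.reg .rsp).toNat) (h2 : (u.reg .rsp).toNat + 8 ≤ 0x800000) :
    UInt64.ofNat ((cw_prologueMem u).readLE (u.reg .rsp) 8) = ret := by
  unfold cw_prologueMem
  u_frame h0

/-- The signed value of a small 32-bit literal. -/
theorem cw_toInt_lit32 (k : Nat) (h : k < 2 ^ 31) : (BitVec.ofNat 32 k).toInt = (k : Int) := by
  unfold BitVec.toInt
  rw [BitVec.toNat_ofNat, Nat.mod_eq_of_lt (by omega), if_pos (by omega)]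

/-- The signed value of the low half of a register that holds a small number. -/
theorem cw_part32_toInt_small (r : Word) (h : r.toNat % 2 ^ 32 < 2 ^ 31) :
    (Word.part Width.w32 r).toInt = ((r.toNat % 2 ^ 32 : Nat) : Int) := by
  rw [Vorbis.Spec.part32_toInt]
  unfold sint32
  rw [if_pos (by omega)]

/-- `movsxd rbx, r13d ; add rbx, r12`: the address of byte `k` of the array at `p`. -/
theorem cw_idx_addr (k : Nat) (p : Word) (hk : k < 2 ^ 31) (hp : p.toNat + k < 2 ^ 64) :
    (Word.ofBV (BitVec.signExtend 64 (BitVec.ofNat 32 k)) + p).toNat = p.toNat + k := by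
  have e : (BitVec.ofNat 32 k).toNat = k := by
    rw [BitVec.toNat_ofNat, Nat.mod_eq_of_lt (by omega)]
  rw [UInt64.toNat_add, Vorbis.Spec.toNat_sext32 _ (by omega), e]
  omega

/-- `add r13d, 1` on a counter below 2³¹. -/
theorem cw_inc_lit32 (k : Nat) : Word.ofBV (BitVec.ofNat 32 k + 1#32) = Word.ofBV (BitVec.ofNat 32 (k + 1)) := by
  rw [BitVec.ofNat_add]

/-- The value of the counter register. -/
theorem cw_cnt_toNat (k : Nat) (h : k < 2 ^ 32) : (Word.ofBV (BitVec.ofNat 32 k)).toNat = k := by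
  rw [Vorbis.toNat_ofBV32, BitVec.toNat_ofNat, Nat.mod_eq_of_lt h]

/-- **A byte of `len[]` read in the body** (the checked load 0x108231 / the unchecked re-reads): the memory differs from the entry
memory only on the function's stack and the frame's shadow bytes, and `len[k]` is off both. `v` is a dead return address of a
check call below the stack pointer. -/
theorem cw_len_byte {u : State} {S : Mem} {lo2 : Nat} (sp : Nat)
    (hsame : Mem.SameExcept [⟨sp - 400, sp⟩, ⟨lo2, lo2 + 24⟩] u.mem S) (p : Word) (k v : Nat) (sp304 : Word)
    (h304 : sp304.toNat = sp - 304) (hsp : 0x700000 + 400 ≤ sp ∧ sp + 8 ≤ 0x800000) (hlo2 : 0xC00000 ≤ lo2) (hk : k < 2 ^ 31)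
    (hwhere : p.toNat + k + 1 ≤ 0xC00000 ∧ (sp + 8 ≤ p.toNat + k ∨ p.toNat + k + 1 ≤ 0x700000 ∨ 0x800000 ≤ p.toNat + k)) :
    (S.writeLE sp304 8 v).readLE (Word.ofBV (BitVec.signExtend 64 (BitVec.ofNat 32 k)) + p) 1 = u.mem.u8 (p.toNat + k) := by
  have ha := cw_idx_addr k p hk (by omega)
  have e1 := (Mem.EqOn.writeLE (p.toNat + k) (p.toNat + k + 1) S sp304 8 v (by omega) (by omega)).readLE
    (Word.ofBV (BitVec.signExtend 64 (BitVec.ofNat 32 k)) + p) 1 (by omega) (by omega) (by omega)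
  have e2 := hsame.readLE (Word.ofBV (BitVec.signExtend 64 (BitVec.ofNat 32 k)) + p) 1 (by omega) (by
    intro w hw
    simp only [List.mem_cons, List.not_mem_nil, or_false] at hw
    rcases hw with rfl | rfl
    · show _ ≤ sp - 400 ∨ sp ≤ _
      omega
    · show _ ≤ lo2 ∨ lo2 + 24 ≤ _
      omega)
  rw [e1, e2]
  show _ = u.mem.readLE (addr (p.toNat + k)) 1
  rw [eq_addr _ _ ha]

/-- The body's facts at a state whose memory agrees with `s`'s on the live part of the stack `[rsp₀ − 296, rsp₀ + 8)` (a dead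
return address was written below the stack pointer, a callee wrote its own frame and its windows). -/
theorem CwBody.carry {u₀ u : State} {ret : Word} {ws ws' : List Span} {s s' : State} (hb : CwBody u₀ u ret ws s)
    (hE : Mem.EqOn ((u.reg .rsp).toNat - 296) ((u.reg .rsp).toNat + 8) s.mem s'.mem)
    (hroom : 0x700000 + 400 ≤ (u.reg .rsp).toNat) (htop : (u.reg .rsp).toNat + 8 ≤ 0x800000)
    (hrsp : s'.reg .rsp = u.reg .rsp - 296) (hcode : Mem.EqOn Vorbis.L.textLo Vorbis.L.textHi u₀.mem s'.mem)
    (hdf : s'.flags .df = false) (hmx : s'.mxcsr &&& 0x1F80 = 0x1F80)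
    (hsame : Mem.SameExcept (⟨(u.reg .rsp).toNat - 400, (u.reg .rsp).toNat⟩ ::
      ⟨0xC00000 + ((u.reg .rsp).toNat - 248) / 8, 0xC00000 + ((u.reg .rsp).toNat - 248) / 8 + 24⟩ :: ws') u.mem s'.mem)
    (hshadow : ShadowUntouched (cw_poisonedMem u) s'.mem) : CwBody u₀ u ret ws' s' := by
  obtain ⟨-, -, -, -, -, -, hs0, hs1, hs2, hs3, hs4, hs5, hs6, hsLen, hsC, hsVal, hsN⟩ := hb
  refine ⟨hrsp, hcode, hdf, hmx, hsame, hshadow, ?_, ?_, ?_, ?_, ?_, ?_, ?_, ?_, ?_, ?_, ?_⟩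
  · rw [hE.readLE _ _ (by u_omega) (by u_omega) (by u_omega)]
    exact hs0
  · rw [hE.readLE _ _ (by u_omega) (by u_omega) (by u_omega)]
    exact hs1
  · rw [hE.readLE _ _ (by u_omega) (by u_omega) (by u_omega)]
    exact hs2
  · rw [hE.readLE _ _ (by u_omega) (by u_omega) (by u_omega)]
    exact hs3
  · rw [hE.readLE _ _ (by u_omega) (by u_omega) (by u_omega)]
    exact hs4
  · rw [hE.readLE _ _ (by u_omega) (by u_omega) (by u_omega)]
    exact hs5
  · rw [hE.readLE _ _ (by u_omega) (by u_omega) (by u_omega)]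
    exact hs6
  · rw [hE.readLE _ _ (by u_omega) (by u_omega) (by u_omega)]
    exact hsLen
  · rw [hE.readLE _ _ (by u_omega) (by u_omega) (by u_omega)]
    exact hsC
  · rw [hE.readLE _ _ (by u_omega) (by u_omega) (by u_omega)]
    exact hsVal
  · rw [hE.readLE _ _ (by u_omega) (by u_omega) (by u_omega)]
    exact hsN

/-- `lea rdi, [rsp + r12*4 + 50H]`, `r12 = movsxd ebx`: the address of `available[i]`, as a number. -/
theorem cw_avail_addr (sp : Word) (i : Nat) (hi : i ≤ 31) (hlo : 0x700000 + 400 ≤ sp.toNat) (hhi : sp.toNat + 8 ≤ 0x800000) :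
    (sp - 296 + Word.ofBV (BitVec.signExtend 64 (BitVec.ofNat 32 i)) * 4 + 80).toNat = sp.toNat - 216 + 4 * i := by
  have e1 : (sp - 296).toNat = sp.toNat - 296 := by
    have hle : (296 : UInt64) ≤ sp := by
      rw [UInt64.le_iff_toNat_le]
      have : (296 : UInt64).toNat = 296 := by decide
      omega
    rw [UInt64.toNat_sub_of_le _ _ hle]
    rfl
  have e0 : (BitVec.ofNat 32 i).toNat = i := by
    rw [BitVec.toNat_ofNat, Nat.mod_eq_of_lt (by omega)]
  have e2 : (Word.ofBV (BitVec.signExtend 64 (BitVec.ofNat 32 i))).toNat = i := by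
    rw [Vorbis.Spec.toNat_sext32 _ (by omega), e0]
  have e4 : (4 : UInt64).toNat = 4 := by decide
  have e80 : (80 : UInt64).toNat = 80 := by decide
  rw [UInt64.toNat_add, UInt64.toNat_add, UInt64.toNat_mul, e1, e2, e4, e80]
  omega

/-- `movzx eax, BYTE PTR [r14]`: the signed value of a zero-extended byte. -/
theorem cw_zext8_toInt (lk : Nat) (h : lk < 256) : (BitVec.zeroExtend 32 (BitVec.ofNat 8 lk)).toInt = (lk : Int) := by
  have e : (BitVec.zeroExtend 32 (BitVec.ofNat 8 lk)).toNat = lk := by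
    simp only [BitVec.zeroExtend, BitVec.toNat_setWidth, BitVec.toNat_ofNat]
    omega
  unfold BitVec.toInt
  rw [e, if_pos (by omega)]

/-- `CwBody.carry` for a store into the spill area between the argument slots and the protected frame (`[rsp₀ − 256]`, the
shadow index, 0x1082b8; `[rsp₀ − 276]`, `m + 1`, 0x10830b): the memories agree on the two groups of slots. -/
theorem CwBody.carry2 {u₀ u : State} {ret : Word} {ws ws' : List Span} {s s' : State} (hb : CwBody u₀ u ret ws s)
    (hE1 : Mem.EqOn ((u.reg .rsp).toNat - 296) ((u.reg .rsp).toNat - 256) s.mem s'.mem)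
    (hE2 : Mem.EqOn ((u.reg .rsp).toNat - 48) ((u.reg .rsp).toNat + 8) s.mem s'.mem)
    (hroom : 0x700000 + 400 ≤ (u.reg .rsp).toNat) (htop : (u.reg .rsp).toNat + 8 ≤ 0x800000)
    (hrsp : s'.reg .rsp = u.reg .rsp - 296) (hcode : Mem.EqOn Vorbis.L.textLo Vorbis.L.textHi u₀.mem s'.mem)
    (hdf : s'.flags .df = false) (hmx : s'.mxcsr &&& 0x1F80 = 0x1F80)
    (hsame : Mem.SameExcept (⟨(u.reg .rsp).toNat - 400, (u.reg .rsp).toNat⟩ ::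
      ⟨0xC00000 + ((u.reg .rsp).toNat - 248) / 8, 0xC00000 + ((u.reg .rsp).toNat - 248) / 8 + 24⟩ :: ws') u.mem s'.mem)
    (hshadow : ShadowUntouched (cw_poisonedMem u) s'.mem) : CwBody u₀ u ret ws' s' := by
  obtain ⟨-, -, -, -, -, -, hs0, hs1, hs2, hs3, hs4, hs5, hs6, hsLen, hsC, hsVal, hsN⟩ := hb
  refine ⟨hrsp, hcode, hdf, hmx, hsame, hshadow, ?_, ?_, ?_, ?_, ?_, ?_, ?_, ?_, ?_, ?_, ?_⟩
  · rw [cw_slot_carry hE1 hE2 _ _ (by u_omega) (by u_omega)]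
    exact hs0
  · rw [cw_slot_carry hE1 hE2 _ _ (by u_omega) (by u_omega)]
    exact hs1
  · rw [cw_slot_carry hE1 hE2 _ _ (by u_omega) (by u_omega)]
    exact hs2
  · rw [cw_slot_carry hE1 hE2 _ _ (by u_omega) (by u_omega)]
    exact hs3
  · rw [cw_slot_carry hE1 hE2 _ _ (by u_omega) (by u_omega)]
    exact hs4
  · rw [cw_slot_carry hE1 hE2 _ _ (by u_omega) (by u_omega)]
    exact hs5
  · rw [cw_slot_carry hE1 hE2 _ _ (by u_omega) (by u_omega)]
    exact hs6
  · rw [cw_slot_carry hE1 hE2 _ _ (by u_omega) (by u_omega)]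
    exact hsLen
  · rw [cw_slot_carry hE1 hE2 _ _ (by u_omega) (by u_omega)]
    exact hsC
  · rw [cw_slot_carry hE1 hE2 _ _ (by u_omega) (by u_omega)]
    exact hsVal
  · rw [cw_slot_carry hE1 hE2 _ _ (by u_omega) (by u_omega)]
    exact hsN

/-- Every register may have changed: the trivial frame fact the walker starts a segment from. -/
abbrev cw_allRegs : List Reg := [.rax, .rcx, .rdx, .rbx, .rsp, .rbp, .rsi, .rdi, .r8, .r9, .r10, .r11, .r12, .r13, .r14, .r15,
  .r16, .r17, .r18, .r19, .r20, .r21, .r22, .r23, .r24, .r25, .r26, .r27, .r28, .r29, .r30, .r31]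

/-- A small 32-bit literal is not negative. -/
theorem cw_msb_lit32 (z : Nat) (h : z < 2 ^ 31) : (BitVec.ofNat 32 z).msb = false := by
  rw [BitVec.msb_eq_decide]
  simp only [decide_eq_false_iff_not, Nat.not_le, BitVec.toNat_ofNat]
  omega

/-- `sub ebx, 1` on a counter that is at least 1. -/
theorem cw_dec_lit32 (z : Nat) (h1 : 1 ≤ z) (h2 : z < 2 ^ 32) : BitVec.ofNat 32 z - 1#32 = BitVec.ofNat 32 (z - 1) := by
  apply BitVec.eq_of_toNat_eq
  rw [BitVec.toNat_sub, BitVec.toNat_ofNat, BitVec.toNat_ofNat, BitVec.toNat_ofNat]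
  omega

/-! ### PART 2. The assertions at the cut points

Everywhere: `u` is the state at the function's first instruction, `n = (u.reg .rdx).toNat % 2 ^ 32` (`= argU32 (u.reg .rdx)`), `len =
(u.reg .rsi).toNat`, `c = (u.reg .rdi).toNat`, `values = (u.reg .rcx).toNat`; `m`, the number of `add_entry` calls made so far, is
`usedCount u.mem len i` at the head of the main loop with index `i` (`m++` at each call, one call per used entry). -/

/-- **The data windows `add_entry` may have written** (the footprint of the contract without the stack and the shadow bytes): dense
`codewords[0 .. n)`; sparse `codewords[0 .. se)`, `codeword_lengths[0 .. se)`, `values[0 .. se)`. The `ws` of `CwBody` from the first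
call of `add_entry` (0x108277) on. -/
def cwWindows (u : State) : List Span :=
  if Codebook.sparse u.mem (u.reg .rdi).toNat = 0 then
    [(cwBlock u.mem (u.reg .rdi).toNat).span]
  else
    [(cwBlock u.mem (u.reg .rdi).toNat).span, (clBlock u.mem (u.reg .rdi).toNat).span,
     ⟨(u.reg .rcx).toNat, (u.reg .rcx).toNat + 4 * (Codebook.sorted_entries u.mem (u.reg .rdi).toNat).toNat⟩]

/-- The windows of a dense book, without the `if`. -/
theorem cw_cwWindows_dense (u : State) (h : Codebook.sparse u.mem (u.reg .rdi).toNat = 0) :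
    cwWindows u = [(cwBlock u.mem (u.reg .rdi).toNat).span] :=
  if_pos h

/-- The windows of a sparse book, without the `if`. -/
theorem cw_cwWindows_sparse (u : State) (h : Codebook.sparse u.mem (u.reg .rdi).toNat ≠ 0) :
    cwWindows u =
      [(cwBlock u.mem (u.reg .rdi).toNat).span, (clBlock u.mem (u.reg .rdi).toNat).span,
       ⟨(u.reg .rcx).toNat, (u.reg .rcx).toNat + 4 * (Codebook.sorted_entries u.mem (u.reg .rdi).toNat).toNat⟩] :=
  if_neg h

/-- **What every cut assertion shares**: the function was entered at `u` by a call, with its precondition, and `s` is a state of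
the body (`CwBody`: steady stack pointer, code, DF / MXCSR, the footprint so far with the data windows `ws`, the shadow as the
prologue left it, the stack slots of the return address, the six saved registers and the four arguments). -/
structure CwAt (others : List Obj) (frames : List (Nat × FrameLayout)) (Blk : Block → Prop) (u₀ u : State) (ret : Word)
    (ws : List Span) (s : State) : Prop where
  /-- the function was entered at `u` by a call -/
  entry : AtEntry (conv u₀) L.compute_codewords.entry (compute_codewords.spec others frames Blk).frame ret u
  /-- the precondition, of the entry state -/
  pre : CodewordsPre others frames Blk u
  /-- the body's facts -/
  body : CwBody u₀ u ret ws s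

/-- **The assertion at `cut1` 0x108218** (after `memset(available, 0, 128)` has returned; line 1127 done): nothing but the stack
and the frame's shadow bytes is written (`ws = []`). -/
structure At1 (others : List Obj) (frames : List (Nat × FrameLayout)) (Blk : Block → Prop) (u₀ u : State) (ret : Word)
    (s : State) : Prop extends CwAt others frames Blk u₀ u ret [] s where
  rip : s.rip = L.compute_codewords.cut1
  /-- `r15` = the shadow index of the frame (`lea rax, [rsp+30H] ; shr rax, 3 ; mov r15, rax`, 0x1081c9 – 0x1081ed); callee-saved -/
  r15 : s.reg .r15 = (u.reg .rsp - 248) >>> 3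
  /-- `ebp = n` (`mov ebp, edx`, 0x1081be); callee-saved -/
  rbp : s.reg .rbp = Word.ofBV (Word.part Width.w32 (u.reg .rdx))
  /-- `r12 = len` (`mov r12, rsi`, 0x1081b6); callee-saved -/
  r12 : s.reg .r12 = u.reg .rsi
  /-- the registers not in the list (rbx, r13, r14) still hold their entry values (memset keeps the callee-saved ones) -/
  kept : RegsKept [.rdi, .rsi, .rdx, .r15, .rax, .rbp, .r12, .rsp, .rcx, .r8, .r9, .r10, .r11, .r16, .r17, .r18, .r19, .r20, .r21,
    .r22, .r23, .r24, .r25, .r26, .r27, .r28, .r29, .r30, .r31] u s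

/-- **The assertion at `chk2` 0x108257** (the `call __asan_load1_noabort` of `len[k]` for `add_entry(c, 0, k, m++, len[k], values)`,
line 1133, NOT yet executed): loop 1120 has found the first used entry `k`. Still `ws = []`. -/
structure AtFirst (others : List Obj) (frames : List (Nat × FrameLayout)) (Blk : Block → Prop) (u₀ u : State) (ret : Word)
    (k : Nat) (s : State) : Prop extends CwAt others frames Blk u₀ u ret [] s where
  rip : s.rip = L.compute_codewords.chk2
  /-- `r13d = k` -/
  r13 : s.reg .r13 = Word.ofBV (BitVec.ofNat 32 k)
  /-- `r14 = len + k` (`movsxd r14, r13d ; add r14, [rsp+8]`, 0x108249 – 0x108251) -/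
  r14 : s.reg .r14 = Word.ofBV (BitVec.signExtend 64 (BitVec.ofNat 32 k)) + u.reg .rsi
  /-- `rdi = r14`, the argument of the check (0x108254) -/
  rdi : s.reg .rdi = Word.ofBV (BitVec.signExtend 64 (BitVec.ofNat 32 k)) + u.reg .rsi
  /-- `r15` = the shadow index of the frame (stored to `[rsp+28H]` at 0x1082b8) -/
  r15 : s.reg .r15 = (u.reg .rsp - 248) >>> 3
  /-- `k < n` (`k ≠ n` at 0x108243, `k ≤ n` from the loop) -/
  k_lt : k < (u.reg .rdx).toNat % 2 ^ 32
  /-- `len[k] ≠ NO_CODE` (the `break` at 0x108234) -/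
  used : u.mem.u8 ((u.reg .rsi).toNat + k) ≠ 255
  /-- every entry before `k` is unused -/
  unused : ∀ j, j < k → u.mem.u8 ((u.reg .rsi).toNat + j) = 255

/-- **The assertion at `cut3` 0x10827c** (after the first `add_entry` has returned; line 1133 done, `m = 1`): from here on the data
windows are `cwWindows u`. `r13`, `r14`, `r15` are callee-saved: as at `chk2`. -/
structure At3 (others : List Obj) (frames : List (Nat × FrameLayout)) (Blk : Block → Prop) (u₀ u : State) (ret : Word)
    (k : Nat) (s : State) : Prop extends CwAt others frames Blk u₀ u ret (cwWindows u) s where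
  rip : s.rip = L.compute_codewords.cut3
  /-- `r13d = k` -/
  r13 : s.reg .r13 = Word.ofBV (BitVec.ofNat 32 k)
  /-- `r14 = len + k` (loop 1126 re-reads `len[k]` through it, unchecked, at 0x1082a6) -/
  r14 : s.reg .r14 = Word.ofBV (BitVec.signExtend 64 (BitVec.ofNat 32 k)) + u.reg .rsi
  /-- `r15` = the shadow index of the frame -/
  r15 : s.reg .r15 = (u.reg .rsp - 248) >>> 3
  /-- `k < n` -/
  k_lt : k < (u.reg .rdx).toNat % 2 ^ 32
  /-- `len[k] ≠ NO_CODE` (so `len[k] ≤ 31` by K7at: the bound of loop 1126's index into `available`) -/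
  used : u.mem.u8 ((u.reg .rsi).toNat + k) ≠ 255
  /-- `k` is the first used entry: `m = 1 = #{j < k + 1 : used}` -/
  cnt : usedCount u.mem (u.reg .rsi).toNat (k + 1) = 1
  /-- sparse: `values[0] = k < n` (add_entry's post) -/
  val : Codebook.sparse u.mem (u.reg .rdi).toNat ≠ 0 →
    VAL s.mem (u.reg .rcx).toNat 1 ((u.reg .rdx).toNat % 2 ^ 32)

/-- **The assertion at `cut8` 0x108345, THE HEAD OF THE MAIN LOOP** `for (i = k+1; i < n; ++i)` (line 1141) with index `i`: `m =
usedCount u.mem len i` entries have been added. Live: `r13d = i`, `r12d = m`, the slot `[rsp+28H]`; rbx, rbp, r14, r15 are dead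
(each is written before it is read on every path from here). THE MEASURE of the composition's induction is `n − i` (`i_le`). -/
structure AtMain (others : List Obj) (frames : List (Nat × FrameLayout)) (Blk : Block → Prop) (u₀ u : State) (ret : Word)
    (i : Nat) (s : State) : Prop extends CwAt others frames Blk u₀ u ret (cwWindows u) s where
  rip : s.rip = L.compute_codewords.cut8
  /-- `r13d = i` -/
  r13 : s.reg .r13 = Word.ofBV (BitVec.ofNat 32 i)
  /-- `r12d = m` -/
  r12 : s.reg .r12 = Word.ofBV (BitVec.ofNat 32 (usedCount u.mem (u.reg .rsi).toNat i))
  /-- `[rsp+28H]` = the shadow index of the frame (`mov [rsp+28H], r15`, 0x1082b8; reloaded on the exits 0x1083a9, 0x1083e4) -/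
  slot : UInt64.ofNat (s.mem.readLE (u.reg .rsp - 256) 8) = (u.reg .rsp - 248) >>> 3
  /-- `i ≤ n` -/
  i_le : i ≤ (u.reg .rdx).toNat % 2 ^ 32
  /-- sparse: `∀ j < m: values[j] < n` -/
  val : Codebook.sparse u.mem (u.reg .rdi).toNat ≠ 0 →
    VAL s.mem (u.reg .rcx).toNat (usedCount u.mem (u.reg .rsi).toNat i) ((u.reg .rdx).toNat % 2 ^ 32)

/-- **The assertion at `chk6` 0x10835c** (the `call __asan_load1_noabort` of `len[i]`, line 1143, NOT yet executed): `i < n`. -/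
structure AtLen (others : List Obj) (frames : List (Nat × FrameLayout)) (Blk : Block → Prop) (u₀ u : State) (ret : Word)
    (i : Nat) (s : State) : Prop extends CwAt others frames Blk u₀ u ret (cwWindows u) s where
  rip : s.rip = L.compute_codewords.chk6
  /-- `i < n` (`jge` not taken at 0x10834c) -/
  i_lt : i < (u.reg .rdx).toNat % 2 ^ 32
  /-- `r13d = i` -/
  r13 : s.reg .r13 = Word.ofBV (BitVec.ofNat 32 i)
  /-- `r12d = m` -/
  r12 : s.reg .r12 = Word.ofBV (BitVec.ofNat 32 (usedCount u.mem (u.reg .rsi).toNat i))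
  /-- `rbp = len + i` (`movsxd rbp, r13d ; add rbp, [rsp+8]`, 0x10834e – 0x108356) -/
  rbp : s.reg .rbp = Word.ofBV (BitVec.signExtend 64 (BitVec.ofNat 32 i)) + u.reg .rsi
  /-- `rdi = rbp`, the argument of the check (0x108359) -/
  rdi : s.reg .rdi = Word.ofBV (BitVec.signExtend 64 (BitVec.ofNat 32 i)) + u.reg .rsi
  /-- `[rsp+28H]` = the shadow index of the frame -/
  slot : UInt64.ofNat (s.mem.readLE (u.reg .rsp - 256) 8) = (u.reg .rsp - 248) >>> 3
  /-- sparse: `∀ j < m: values[j] < n` -/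
  val : Codebook.sparse u.mem (u.reg .rdi).toNat ≠ 0 →
    VAL s.mem (u.reg .rcx).toNat (usedCount u.mem (u.reg .rsi).toNat i) ((u.reg .rdx).toNat % 2 ^ 32)

/-- **The assertion at `cut5` 0x1082c5, the head of loop 1143** `while (z > 0 && !available[z]) --z;` at its FIRST arrival (from
0x10836b: `z = len[i] ≠ 255`; the loop's own rounds are inside segment 7). -/
structure AtScan (others : List Obj) (frames : List (Nat × FrameLayout)) (Blk : Block → Prop) (u₀ u : State) (ret : Word)
    (i : Nat) (s : State) : Prop extends CwAt others frames Blk u₀ u ret (cwWindows u) s where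
  rip : s.rip = L.compute_codewords.cut5
  /-- `i < n` -/
  i_lt : i < (u.reg .rdx).toNat % 2 ^ 32
  /-- `len[i] ≠ NO_CODE` (`jne` taken at 0x10836b; so `len[i] ≤ 31` by K7at) -/
  used : u.mem.u8 ((u.reg .rsi).toNat + i) ≠ 255
  /-- `r13d = i` -/
  r13 : s.reg .r13 = Word.ofBV (BitVec.ofNat 32 i)
  /-- `r12d = m` -/
  r12 : s.reg .r12 = Word.ofBV (BitVec.ofNat 32 (usedCount u.mem (u.reg .rsi).toNat i))
  /-- `rbp = len + i` (re-read unchecked at 0x108301, 0x108332) -/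
  rbp : s.reg .rbp = Word.ofBV (BitVec.signExtend 64 (BitVec.ofNat 32 i)) + u.reg .rsi
  /-- `ebx = z = len[i]` (`movzx ebx, BYTE PTR [rbp]`, 0x108361) -/
  rbx : s.reg .rbx = Word.ofBV (BitVec.ofNat 32 (u.mem.u8 ((u.reg .rsi).toNat + i)))
  /-- `[rsp+28H]` = the shadow index of the frame -/
  slot : UInt64.ofNat (s.mem.readLE (u.reg .rsp - 256) 8) = (u.reg .rsp - 248) >>> 3
  /-- sparse: `∀ j < m: values[j] < n` -/
  val : Codebook.sparse u.mem (u.reg .rdi).toNat ≠ 0 →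
    VAL s.mem (u.reg .rcx).toNat (usedCount u.mem (u.reg .rsi).toNat i) ((u.reg .rdx).toNat % 2 ^ 32)

/-- **The assertion at `chk5` 0x1082ee** (the `call __asan_load4_noabort` of `available[z]` for `res = available[z]`, line 1154, NOT
yet executed): loop 1143 has stopped at `z`, `1 ≤ z ≤ len[i]`. -/
structure AtRes (others : List Obj) (frames : List (Nat × FrameLayout)) (Blk : Block → Prop) (u₀ u : State) (ret : Word)
    (i z : Nat) (s : State) : Prop extends CwAt others frames Blk u₀ u ret (cwWindows u) s where
  rip : s.rip = L.compute_codewords.chk5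
  /-- `i < n` -/
  i_lt : i < (u.reg .rdx).toNat % 2 ^ 32
  /-- `len[i] ≠ NO_CODE` -/
  used : u.mem.u8 ((u.reg .rsi).toNat + i) ≠ 255
  /-- `z ≠ 0` (`je 1083e4` not taken at 0x1082e0) -/
  z_pos : 1 ≤ z
  /-- `z` only went down from `len[i]` -/
  z_le : z ≤ u.mem.u8 ((u.reg .rsi).toNat + i)
  /-- `r13d = i` -/
  r13 : s.reg .r13 = Word.ofBV (BitVec.ofNat 32 i)
  /-- `r12d = m` -/
  r12 : s.reg .r12 = Word.ofBV (BitVec.ofNat 32 (usedCount u.mem (u.reg .rsi).toNat i))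
  /-- `rbp = len + i` -/
  rbp : s.reg .rbp = Word.ofBV (BitVec.signExtend 64 (BitVec.ofNat 32 i)) + u.reg .rsi
  /-- `ebx = z` -/
  rbx : s.reg .rbx = Word.ofBV (BitVec.ofNat 32 z)
  /-- `r15 = z` (`movsxd r15, ebx`, 0x1082e6) -/
  r15 : s.reg .r15 = Word.ofBV (BitVec.signExtend 64 (BitVec.ofNat 32 z))
  /-- `rdi = &available[z]` (`lea rdi, [rsp+r15*4+50H]`, 0x1082e9), the argument of the check -/
  rdi : s.reg .rdi = u.reg .rsp - 296 + Word.ofBV (BitVec.signExtend 64 (BitVec.ofNat 32 z)) * 4 + 80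
  /-- `[rsp+28H]` = the shadow index of the frame -/
  slot : UInt64.ofNat (s.mem.readLE (u.reg .rsp - 256) 8) = (u.reg .rsp - 248) >>> 3
  /-- sparse: `∀ j < m: values[j] < n` -/
  val : Codebook.sparse u.mem (u.reg .rdi).toNat ≠ 0 →
    VAL s.mem (u.reg .rcx).toNat (usedCount u.mem (u.reg .rsi).toNat i) ((u.reg .rdx).toNat % 2 ^ 32)

/-- **The assertion at `cut9` 0x108373, the head of loop 1150** `for (y = len[i]; y > z; --y)` at its FIRST arrival (from 0x10833a:
`len[i] ≠ z`, after the second `add_entry` has returned; the loop's own rounds are inside segment 9): `m + 1 = usedCount u.mem len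
(i + 1)` entries have been added, the new count is in the slot `[rsp+14H]` (reloaded into r12d at 0x1083a2). -/
structure AtProp (others : List Obj) (frames : List (Nat × FrameLayout)) (Blk : Block → Prop) (u₀ u : State) (ret : Word)
    (i z : Nat) (s : State) : Prop extends CwAt others frames Blk u₀ u ret (cwWindows u) s where
  rip : s.rip = L.compute_codewords.cut9
  /-- `i < n` -/
  i_lt : i < (u.reg .rdx).toNat % 2 ^ 32
  /-- `len[i] ≠ NO_CODE` (so `y = len[i] ≤ 31` by K7at: the bound of loop 1150's index into `available`) -/
  used : u.mem.u8 ((u.reg .rsi).toNat + i) ≠ 255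
  /-- `1 ≤ z` -/
  z_pos : 1 ≤ z
  /-- `z ≤ len[i]` -/
  z_le : z ≤ u.mem.u8 ((u.reg .rsi).toNat + i)
  /-- `r13d = i` -/
  r13 : s.reg .r13 = Word.ofBV (BitVec.ofNat 32 i)
  /-- `r12d = y = len[i]` (`movzx r12d, BYTE PTR [rbp]`, 0x108332: re-read after add_entry, unchecked) -/
  r12 : s.reg .r12 = Word.ofBV (BitVec.ofNat 32 (u.mem.u8 ((u.reg .rsi).toNat + i)))
  /-- `ebx = z` (callee-saved over bit_reverse and add_entry) -/
  rbx : s.reg .rbx = Word.ofBV (BitVec.ofNat 32 z)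
  /-- `[rsp+28H]` = the shadow index of the frame -/
  slot : UInt64.ofNat (s.mem.readLE (u.reg .rsp - 256) 8) = (u.reg .rsp - 248) >>> 3
  /-- `[rsp+14H] = m + 1` (`lea eax, [r12+1] ; mov [rsp+14H], eax`, 0x108306 – 0x10830b) -/
  slotM : s.mem.readLE (u.reg .rsp - 276) 4 = usedCount u.mem (u.reg .rsi).toNat (i + 1)
  /-- sparse: `∀ j < m + 1: values[j] < n` (`values[m] = i`, add_entry's post) -/
  val : Codebook.sparse u.mem (u.reg .rdi).toNat ≠ 0 →
    VAL s.mem (u.reg .rcx).toNat (usedCount u.mem (u.reg .rsi).toNat (i + 1)) ((u.reg .rdx).toNat % 2 ^ 32)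

/-! ### PART 2b. What the segments' proofs take from the assertions (pure lemmas) -/

/-- The prologue's stack stores (below the entry stack pointer) write no shadow byte. -/
theorem cw_prologue_untouched (u : State) (he_room : 7340032 + 400 ≤ (u.reg .rsp).toNat)
    (he_top : (u.reg .rsp).toNat + 8 ≤ 8388608) : ShadowUntouched u.mem (cw_prologueMem u) := by
  unfold cw_prologueMem
  v_untouched

/-- **The shadow layer of the body** (`cw_frame_pushed` for the memory `cw_poisonedMem u`): what the check sites in `available`
(`cw_check_available`), the checks of `len[·]` (`check_site`) and the callees' `ShadowPre` start from. -/
theorem cw_inv_pushed {others : List Obj} {frames : List (Nat × FrameLayout)} {u : State} (hsh : ShadowPre others frames u)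
    (he_align : (u.reg .rsp).toNat % 8 = 0) (he_room : 7340032 + 400 ≤ (u.reg .rsp).toNat)
    (he_top : (u.reg .rsp).toNat + 8 ≤ 8388608) :
    ShadowInv others (((u.reg .rsp).toNat - 248, Vorbis.Frames.compute_codewords) :: frames) ((u.reg .rsp).toNat - 296)
      (cw_poisonedMem u) :=
  cw_frame_pushed (u.reg .rsp) hsh.inv he_align (by omega) he_top (cw_prologue_untouched u he_room he_top)

/-- **The footprint at an exit**: what the body may have written (its stack, the frame's 24 shadow bytes, data windows among
`cwWindows u`) is inside the contract's footprint, per case of `spec_writes_dense / _sparse`. `ws = []` (segment 2) or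
`ws = cwWindows u` (segments 5, 7). -/
theorem cw_foot_of_body (others : List Obj) (frames : List (Nat × FrameLayout)) (Blk : Block → Prop) (u : State) (ws : List Span)
    (hws : ∀ w, w ∈ ws → w ∈ cwWindows u) (S : Mem)
    (h : Mem.SameExcept (⟨(u.reg .rsp).toNat - 400, (u.reg .rsp).toNat⟩ ::
      ⟨0xC00000 + ((u.reg .rsp).toNat - 248) / 8, 0xC00000 + ((u.reg .rsp).toNat - 248) / 8 + 24⟩ :: ws) u.mem S) :
    Mem.SameExcept ((compute_codewords.spec others frames Blk).footprint u) u.mem S := by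
  refine h.mono ?_
  intro w hw a h1 h2
  refine ⟨w, ?_, h1, h2⟩
  simp only [X86.User.Spec.footprint, spec_frame]
  rcases List.mem_cons.mp hw with e | hw'
  · rw [e]
    exact List.mem_cons_self
  · apply List.mem_cons_of_mem
    by_cases hs : Codebook.sparse u.mem (u.reg .rdi).toNat = 0
    · rw [spec_writes_dense others frames Blk u hs]
      rcases List.mem_cons.mp hw' with e | hw''
      · rw [e]
        simp only [shadowSpan, List.mem_cons, List.not_mem_nil, or_false, or_true]
      · have hin := hws w hw''
        rw [cw_cwWindows_dense u hs] at hin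
        simp only [List.mem_cons, List.not_mem_nil, or_false] at hin
        rw [hin]
        simp only [List.mem_cons, true_or]
    · rw [spec_writes_sparse others frames Blk u hs]
      rcases List.mem_cons.mp hw' with e | hw''
      · rw [e]
        simp only [shadowSpan, List.mem_cons, List.not_mem_nil, or_false, or_true]
      · have hin := hws w hw''
        rw [cw_cwWindows_sparse u hs] at hin
        simp only [List.mem_cons, List.not_mem_nil, or_false] at hin
        rcases hin with e | e | e
        · rw [e]
          simp only [List.mem_cons, true_or]
        · rw [e]
          simp only [List.mem_cons, true_or, or_true]
        · rw [e]
          simp only [List.mem_cons, true_or, or_true]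

/-- **VAL over stores that miss the `values` block**: windows inside the stack region below the entry's `rsp + 8` (dead return
addresses, `available[·]`, the spill slots) or in the shadow. The block `values` (`4·se` bytes, allocated) is off both. -/
theorem cw_val_carry {others : List Obj} {frames : List (Nat × FrameLayout)} {Blk : Block → Prop} {u : State}
    (hpre : CodewordsPre others frames Blk u) (he_room : 7340032 + 400 ≤ (u.reg .rsp).toNat)
    (he_top : (u.reg .rsp).toNat + 8 ≤ 8388608) (hsparse : Codebook.sparse u.mem (u.reg .rdi).toNat ≠ 0) {S S' : Mem} {m e : Nat}
    (hm : m ≤ (Codebook.sorted_entries u.mem (u.reg .rdi).toNat).toNat)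
    (h : VAL S (u.reg .rcx).toNat m e) {ws : List Span} (hs : Mem.SameExcept ws S S')
    (hws : ∀ w, w ∈ ws → (0x700000 ≤ w.lo ∧ w.hi ≤ (u.reg .rsp).toNat + 8) ∨ 0xC00000 ≤ w.lo) :
    VAL S' (u.reg .rcx).toNat m e := by
  by_cases hm0 : m = 0
  · intro k hk
    omega
  · have hsp := hpre.shadow.rsp
    have hsize : 1 ≤ 4 * (Codebook.sorted_entries u.mem (u.reg .rdi).toNat).toNat := by
      omega
    have hw := blk_where hpre.live hpre.shadow.inv hpre.shadow.offText (by omega) (hpre.sparse hsparse).2 hsize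
    have hw' : (u.reg .rcx).toNat + 4 * (Codebook.sorted_entries u.mem (u.reg .rdi).toNat).toNat ≤ 0xC00000 ∧
        ((u.reg .rsp).toNat + 8 ≤ (u.reg .rcx).toNat ∨
          (u.reg .rcx).toNat + 4 * (Codebook.sorted_entries u.mem (u.reg .rdi).toNat).toNat ≤ 0x700000 ∨
          0x800000 ≤ (u.reg .rcx).toNat) := ⟨hw.2.1, hw.2.2⟩
    refine VAL.same h (hs.eqOn _ _ ?_) (by omega)
    intro w hwm
    rcases hws w hwm with hstack | hshadow
    · omega
    · omega

/-- A used entry's length indexes `available[32]`: `len[j] ≤ 31` (K7at, the hard precondition). -/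
theorem cw_len_le31 {others : List Obj} {frames : List (Nat × FrameLayout)} {Blk : Block → Prop} {u : State}
    (hpre : CodewordsPre others frames Blk u) {j : Nat} (hj : j < (u.reg .rdx).toNat % 2 ^ 32)
    (hused : u.mem.u8 ((u.reg .rsi).toNat + j) ≠ 255) : u.mem.u8 ((u.reg .rsi).toNat + j) ≤ 31 := by
  rcases hpre.k7 j hj with h | h
  · exact h
  · exact absurd h hused

/-- `n = c.entries`, as numbers. -/
theorem cw_entries_eq {others : List Obj} {frames : List (Nat × FrameLayout)} {Blk : Block → Prop} {u : State}
    (hpre : CodewordsPre others frames Blk u) :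
    (Codebook.entries u.mem (u.reg .rdi).toNat).toNat = (u.reg .rdx).toNat % 2 ^ 32 := by
  have h1 : (((u.reg .rdx).toNat % 2 ^ 32 : Nat) : Int) = Codebook.entries u.mem (u.reg .rdi).toNat := hpre.n_eq
  omega

/-- `n < 2^24` (K1). -/
theorem cw_n_lt {others : List Obj} {frames : List (Nat × FrameLayout)} {Blk : Block → Prop} {u : State}
    (hpre : CodewordsPre others frames Blk u) : (u.reg .rdx).toNat % 2 ^ 32 < 16777216 := by
  have h1 : (((u.reg .rdx).toNat % 2 ^ 32 : Nat) : Int) = Codebook.entries u.mem (u.reg .rdi).toNat := hpre.n_eq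
  have h2 := hpre.K1.ent_lt
  omega

/-- **CNT at the exit `i = n`**: `m = usedCount n = se`. -/
theorem cw_used_all {others : List Obj} {frames : List (Nat × FrameLayout)} {Blk : Block → Prop} {u : State}
    (hpre : CodewordsPre others frames Blk u) (hsparse : Codebook.sparse u.mem (u.reg .rdi).toNat ≠ 0) :
    usedCount u.mem (u.reg .rsi).toNat ((u.reg .rdx).toNat % 2 ^ 32) =
      (Codebook.sorted_entries u.mem (u.reg .rdi).toNat).toNat := by
  have hcnt := (hpre.sparse hsparse).1
  unfold CNT at hcnt
  rw [cw_entries_eq hpre] at hcnt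
  omega

/-- The running count never passes `se` (sparse). -/
theorem cw_used_le {others : List Obj} {frames : List (Nat × FrameLayout)} {Blk : Block → Prop} {u : State}
    (hpre : CodewordsPre others frames Blk u) (hsparse : Codebook.sparse u.mem (u.reg .rdi).toNat ≠ 0) {i : Nat}
    (hi : i ≤ (u.reg .rdx).toNat % 2 ^ 32) :
    usedCount u.mem (u.reg .rsi).toNat i ≤ (Codebook.sorted_entries u.mem (u.reg .rdi).toNat).toNat := by
  rw [← cw_used_all hpre hsparse]
  exact usedCount_mono _ _ hi

/-- **The precondition `count < se` of `add_entry`** at a used entry `i < n` (sparse; CNT and `Vorbis.usedCount_lt`). -/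
theorem cw_used_lt {others : List Obj} {frames : List (Nat × FrameLayout)} {Blk : Block → Prop} {u : State}
    (hpre : CodewordsPre others frames Blk u) (hsparse : Codebook.sparse u.mem (u.reg .rdi).toNat ≠ 0) {i : Nat}
    (hi : i < (u.reg .rdx).toNat % 2 ^ 32) (hused : u.mem.u8 ((u.reg .rsi).toNat + i) ≠ 255) :
    usedCount u.mem (u.reg .rsi).toNat i < (Codebook.sorted_entries u.mem (u.reg .rdi).toNat).toNat := by
  rw [← cw_used_all hpre hsparse]
  exact usedCount_lt hi hused

/-- The first used entry `k`: `#{j < k + 1 : used} = 1` (the `cnt` of `At3`). -/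
theorem cw_used_first {mem : Mem} {p k : Nat} (hunused : ∀ j, j < k → mem.u8 (p + j) = 255) (hused : mem.u8 (p + k) ≠ 255) :
    usedCount mem p (k + 1) = 1 := by
  have h0 : usedCount mem p k = 0 := by
    apply countBelow_eq_zero
    intro j hj
    unfold usedP
    exact decide_eq_false (fun hne => hne (hunused j hj))
  rw [usedCount_succ_used hused, h0]

/-- Every register is in `cw_allRegs`: the trivial frame fact a segment's walk starts from. -/
theorem cw_kept_all (u s : State) : RegsKept cw_allRegs u s := by
  intro r hr
  cases r <;> exact absurd hr (by decide)

/-- **A byte of `len[0 .. n)` read in the body after `add_entry` has run** (the unchecked re-reads 0x1082a6, 0x108301, 0x108332, and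
the checked loads 0x108361): the memory differs from the entry memory only on the function's stack, the frame's shadow bytes and the
data windows `cwWindows u`, and `len[0 .. n)` is off all of them (`blk_where`; `apartDense` / `apartSparse` of the precondition). -/
theorem cw_len_kept {others : List Obj} {frames : List (Nat × FrameLayout)} {Blk : Block → Prop} {u : State}
    (hpre : CodewordsPre others frames Blk u) (he_room : 7340032 + 400 ≤ (u.reg .rsp).toNat)
    (he_top : (u.reg .rsp).toNat + 8 ≤ 8388608) {S : Mem}
    (hsame : Mem.SameExcept (⟨(u.reg .rsp).toNat - 400, (u.reg .rsp).toNat⟩ ::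
      ⟨0xC00000 + ((u.reg .rsp).toNat - 248) / 8, 0xC00000 + ((u.reg .rsp).toNat - 248) / 8 + 24⟩ :: cwWindows u) u.mem S)
    {j : Nat} (hj : j < (u.reg .rdx).toNat % 2 ^ 32) (a : Word) (ha : a.toNat = (u.reg .rsi).toNat + j) :
    S.readLE a 1 = u.mem.u8 ((u.reg .rsi).toNat + j) := by
  have hsh := hpre.shadow
  have hsp := hsh.rsp
  have hw : Vorbis.L.textHi ≤ (u.reg .rsi).toNat ∧ (u.reg .rsi).toNat + (u.reg .rdx).toNat % 2 ^ 32 ≤ 0xC00000 ∧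
      ((u.reg .rsp).toNat + 8 ≤ (u.reg .rsi).toNat ∨ (u.reg .rsi).toNat + (u.reg .rdx).toNat % 2 ^ 32 ≤ 0x700000 ∨
        0x800000 ≤ (u.reg .rsi).toNat) :=
    blk_where hpre.live hsh.inv hsh.offText (by omega) hpre.lens (by show 1 ≤ (u.reg .rdx).toNat % 2 ^ 32; omega)
  have e : S.readLE a 1 = u.mem.readLE a 1 := by
    refine hsame.readLE a 1 (by omega) ?_
    intro w hwm
    rcases List.mem_cons.mp hwm with e | hwm
    · rw [e]
      show a.toNat + 1 ≤ (u.reg .rsp).toNat - 400 ∨ (u.reg .rsp).toNat ≤ a.toNat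
      omega
    rcases List.mem_cons.mp hwm with e | hwm
    · rw [e]
      show a.toNat + 1 ≤ 0xC00000 + ((u.reg .rsp).toNat - 248) / 8 ∨ _
      omega
    · by_cases hs : Codebook.sparse u.mem (u.reg .rdi).toNat = 0
      · rw [cw_cwWindows_dense u hs] at hwm
        have hap := hpre.apartDense hs
        have hpair := (List.pairwise_cons.mp (List.pairwise_cons.mp hap).2).1
        simp only [List.mem_cons, List.not_mem_nil, or_false] at hwm
        have hd := hpair (cwBlock u.mem (u.reg .rdi).toNat) (by simp only [List.mem_cons, true_or])
        rw [hwm]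
        simp only [Block.disjoint, Block.span, argU32] at hd ⊢
        omega
      · rw [cw_cwWindows_sparse u hs] at hwm
        have hap := hpre.apartSparse hs
        have hpair := (List.pairwise_cons.mp (List.pairwise_cons.mp hap).2).1
        simp only [List.mem_cons, List.not_mem_nil, or_false] at hwm
        rcases hwm with e | e | e
        · have hd := hpair (cwBlock u.mem (u.reg .rdi).toNat) (by simp only [List.mem_cons, true_or])
          rw [e]
          simp only [Block.disjoint, Block.span, argU32] at hd ⊢
          omega
        · have hd := hpair (clBlock u.mem (u.reg .rdi).toNat) (by simp only [List.mem_cons, true_or, or_true])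
          rw [e]
          simp only [Block.disjoint, Block.span, argU32] at hd ⊢
          omega
        · have hd := hpair ⟨(u.reg .rcx).toNat, 4 * (Codebook.sorted_entries u.mem (u.reg .rdi).toNat).toNat⟩
            (by simp only [List.mem_cons, true_or, or_true])
          rw [e]
          simp only [Block.disjoint, argU32] at hd ⊢
          omega
  rw [e]
  show _ = u.mem.readLE (addr ((u.reg .rsi).toNat + j)) 1
  rw [eq_addr _ _ ha]

/-- The footprint before the first `add_entry` (`ws = []`) is a footprint with the data windows. -/
theorem cw_same_nil_windows {μ S : Mem} {A B : Span} (ws : List Span) (h : Mem.SameExcept [A, B] μ S) :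
    Mem.SameExcept (A :: B :: ws) μ S := by
  refine h.mono ?_
  intro w hw a h1 h2
  refine ⟨w, ?_, h1, h2⟩
  rcases List.mem_cons.mp hw with e | hw'
  · rw [e]
    exact List.mem_cons_self
  · have e := List.mem_singleton.mp hw'
    rw [e]
    exact List.mem_cons_of_mem _ List.mem_cons_self

/-- Where the struct `*c` is: inside an allocated block, so off the stack region below the entry's `rsp + 8` and below the shadow. -/
theorem cw_book_where {others : List Obj} {frames : List (Nat × FrameLayout)} {Blk : Block → Prop} {u : State}
    (hpre : CodewordsPre others frames Blk u) (he_room : 7340032 + 400 ≤ (u.reg .rsp).toNat) :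
    Vorbis.L.textHi ≤ (u.reg .rdi).toNat ∧ (u.reg .rdi).toNat + 2120 ≤ 0xC00000 ∧
      ((u.reg .rsp).toNat + 8 ≤ (u.reg .rdi).toNat ∨ (u.reg .rdi).toNat + 2120 ≤ 0x700000 ∨
        0x800000 ≤ (u.reg .rdi).toNat) := by
  have hsh := hpre.shadow
  obtain ⟨B, hB, hin⟩ := hpre.book
  simp only [Block.contains, Off.sizeof.Codebook] at hin
  have hw := blk_where hpre.live hsh.inv hsh.offText (by omega) hB (by omega)
  omega

/-- **The struct `*c` read in the body** (`sparse`, `codewords`, `codeword_lengths`, … re-read by `add_entry`; `[rsp+18H]` is `c`):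
it reads as at the entry, because the body's windows (stack, the frame's shadow bytes, `cwWindows u`) miss it (`cw_book_where`;
`apartDense` / `apartSparse` of the precondition). `Codebook.SameFields.of_same` turns this into the equality of every field. -/
theorem cw_book_kept {others : List Obj} {frames : List (Nat × FrameLayout)} {Blk : Block → Prop} {u : State}
    (hpre : CodewordsPre others frames Blk u) (he_room : 7340032 + 400 ≤ (u.reg .rsp).toNat)
    (he_top : (u.reg .rsp).toNat + 8 ≤ 8388608) {S : Mem}
    (hsame : Mem.SameExcept (⟨(u.reg .rsp).toNat - 400, (u.reg .rsp).toNat⟩ ::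
      ⟨0xC00000 + ((u.reg .rsp).toNat - 248) / 8, 0xC00000 + ((u.reg .rsp).toNat - 248) / 8 + 24⟩ :: cwWindows u) u.mem S) :
    (Codebook.block (u.reg .rdi).toNat).Same u.mem S := by
  have hw := cw_book_where hpre he_room
  show Mem.EqOn (u.reg .rdi).toNat ((u.reg .rdi).toNat + Off.sizeof.Codebook) u.mem S
  simp only [Off.sizeof.Codebook]
  refine hsame.eqOn _ _ ?_
  intro w hwm
  rcases List.mem_cons.mp hwm with e | hwm
  · rw [e]
    show (u.reg .rdi).toNat + 2120 ≤ (u.reg .rsp).toNat - 400 ∨ (u.reg .rsp).toNat ≤ (u.reg .rdi).toNat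
    omega
  rcases List.mem_cons.mp hwm with e | hwm
  · rw [e]
    show (u.reg .rdi).toNat + 2120 ≤ 0xC00000 + ((u.reg .rsp).toNat - 248) / 8 ∨ _
    omega
  · by_cases hs : Codebook.sparse u.mem (u.reg .rdi).toNat = 0
    · rw [cw_cwWindows_dense u hs] at hwm
      have hap := hpre.apartDense hs
      have hpair := (List.pairwise_cons.mp hap).1
      simp only [List.mem_cons, List.not_mem_nil, or_false] at hwm
      have hd := hpair (cwBlock u.mem (u.reg .rdi).toNat) (by simp only [List.mem_cons, true_or, or_true])
      rw [hwm]
      simp only [Block.disjoint, Block.span, Off.sizeof.Codebook] at hd ⊢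
      omega
    · rw [cw_cwWindows_sparse u hs] at hwm
      have hap := hpre.apartSparse hs
      have hpair := (List.pairwise_cons.mp hap).1
      simp only [List.mem_cons, List.not_mem_nil, or_false] at hwm
      rcases hwm with e | e | e
      · have hd := hpair (cwBlock u.mem (u.reg .rdi).toNat) (by simp only [List.mem_cons, true_or, or_true])
        rw [e]
        simp only [Block.disjoint, Block.span, Off.sizeof.Codebook] at hd ⊢
        omega
      · have hd := hpair (clBlock u.mem (u.reg .rdi).toNat) (by simp only [List.mem_cons, true_or, or_true])
        rw [e]
        simp only [Block.disjoint, Block.span, Off.sizeof.Codebook] at hd ⊢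
        omega
      · have hd := hpair ⟨(u.reg .rcx).toNat, 4 * (Codebook.sorted_entries u.mem (u.reg .rdi).toNat).toNat⟩
          (by simp only [List.mem_cons, true_or, or_true])
        rw [e]
        simp only [Block.disjoint, Off.sizeof.Codebook] at hd ⊢
        omega

/-- Every field of `*c` reads in the body as at the entry. -/
theorem cw_fields_kept {others : List Obj} {frames : List (Nat × FrameLayout)} {Blk : Block → Prop} {u : State}
    (hpre : CodewordsPre others frames Blk u) (he_room : 7340032 + 400 ≤ (u.reg .rsp).toNat)
    (he_top : (u.reg .rsp).toNat + 8 ≤ 8388608) {S : Mem}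
    (hsame : Mem.SameExcept (⟨(u.reg .rsp).toNat - 400, (u.reg .rsp).toNat⟩ ::
      ⟨0xC00000 + ((u.reg .rsp).toNat - 248) / 8, 0xC00000 + ((u.reg .rsp).toNat - 248) / 8 + 24⟩ :: cwWindows u) u.mem S) :
    Codebook.SameFields u.mem S (u.reg .rdi).toNat := by
  have hw := cw_book_where hpre he_room
  refine Codebook.SameFields.of_same ?_ (cw_book_kept hpre he_room he_top hsame)
  simp only [Off.sizeof.Codebook]
  omega

/-- **The precondition of `add_entry(c, code, j, m, len[j], values)` called from the body of compute_codewords** at a used entry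
`j < n` with `m = usedCount u.mem len j` entries added so far (both calls: 0x108277 with `j = k`, `m = 0`; 0x10832d with `j = i`):
the shadow layer with the frame pushed, the struct, dense the word `codewords[j]` (K3t / K3n), sparse `m < se` (CNT, `cw_used_lt`) and
the three cells inside the blocks of K3t / the `values` block, apart by `apartSparse`. `t` is the state at add_entry's entry. -/
theorem cw_add_entry_pre {others : List Obj} {frames : List (Nat × FrameLayout)} {Blk : Block → Prop} {u t : State}
    (hpre : CodewordsPre others frames Blk u) (he_align : (u.reg .rsp).toNat % 8 = 0)
    (he_room : 7340032 + 400 ≤ (u.reg .rsp).toNat) (he_top : (u.reg .rsp).toNat + 8 ≤ 8388608)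
    (hsame : Mem.SameExcept (⟨(u.reg .rsp).toNat - 400, (u.reg .rsp).toNat⟩ ::
      ⟨0xC00000 + ((u.reg .rsp).toNat - 248) / 8, 0xC00000 + ((u.reg .rsp).toNat - 248) / 8 + 24⟩ :: cwWindows u) u.mem t.mem)
    (hun : ShadowUntouched (cw_poisonedMem u) t.mem)
    (h_rsp : t.reg .rsp = u.reg .rsp - 304) (h_rdi : t.reg .rdi = u.reg .rdi) (h_r9 : t.reg .r9 = u.reg .rcx)
    {j : Nat} (h_rdx : t.reg .rdx = Word.ofBV (BitVec.ofNat 32 j))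
    (h_rcx : t.reg .rcx = Word.ofBV (BitVec.ofNat 32 (usedCount u.mem (u.reg .rsi).toNat j)))
    (hj : j < (u.reg .rdx).toNat % 2 ^ 32) (hused : u.mem.u8 ((u.reg .rsi).toNat + j) ≠ 255) :
    AddEntryPre others (((u.reg .rsp).toNat - 248, Vorbis.Frames.compute_codewords) :: frames) t := by
  have hsh := hpre.shadow
  have hsp := hsh.rsp
  have hn24 := cw_n_lt hpre
  have hinvB := cw_inv_pushed hsh he_align he_room he_top
  have hLive := cw_blkLive_pushed ((u.reg .rsp).toNat - 248) Vorbis.Frames.compute_codewords hpre.live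
  have hfld := cw_fields_kept hpre he_room he_top hsame
  have hjn : (Word.ofBV (BitVec.ofNat 32 j)).toNat = j := cw_cnt_toNat j (by omega)
  have hm_le := usedCount_le u.mem (u.reg .rsi).toNat j
  have hmn : (Word.ofBV (BitVec.ofNat 32 (usedCount u.mem (u.reg .rsi).toNat j))).toNat =
      usedCount u.mem (u.reg .rsi).toNat j := cw_cnt_toNat _ (by omega)
  refine ⟨⟨?_, hsh.offText⟩, ?_, ?_, ?_⟩
  · -- the shadow layer: the callee's `rsp + 8` is the body's stack pointer
    have e304 : (u.reg .rsp - 304).toNat = (u.reg .rsp).toNat - 304 := by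
      have hle : (304 : UInt64) ≤ u.reg .rsp := by
        rw [UInt64.le_iff_toNat_le]
        have : (304 : UInt64).toNat = 304 := by decide
        omega
      rw [UInt64.toNat_sub_of_le _ _ hle]
      rfl
    have e : (t.reg .rsp).toNat + 8 = (u.reg .rsp).toNat - 296 := by
      rw [h_rsp, e304]
      omega
    rw [e]
    exact hinvB.untouched hun
  · -- the struct
    rw [h_rdi]
    obtain ⟨B, hB, hin⟩ := hpre.book
    exact Site.of_blk hLive hB hin.1 hin.2 (by decide)
  · -- dense: `codewords[j]`, `j < n = entries`
    intro hs
    rw [h_rdi, hfld.sparse] at hs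
    constructor
    · show (t.reg .rdx).toNat % 2 ^ 32 < 2 ^ 31
      rw [h_rdx, hjn]
      omega
    · have e : (add_entry.denseCell t).base = Codebook.codewords u.mem (u.reg .rdi).toNat + 4 * j := by
        show Codebook.codewords t.mem (t.reg .rdi).toNat + 4 * ((t.reg .rdx).toNat % 2 ^ 32) = _
        rw [h_rdi, h_rdx, hjn, hfld.codewords, Nat.mod_eq_of_lt (by omega)]
      rw [e]
      refine hpre.K3t.site_codewords hLive hpre.K2 j ?_ rfl
      rw [Codebook.N_dense hs]
      have hn : (((u.reg .rdx).toNat % 2 ^ 32 : Nat) : Int) = Codebook.entries u.mem (u.reg .rdi).toNat := hpre.n_eq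
      omega
  · -- sparse: `m < se`, the three cells
    intro hs
    rw [h_rdi, hfld.sparse] at hs
    have hs1 : Codebook.sparse u.mem (u.reg .rdi).toNat = 1 := by
      rcases hpre.K2.sparse_01 with h | h
      · exact absurd h hs
      · exact h
    have hlt := cw_used_lt hpre hs hj hused
    obtain ⟨_, hvals⟩ := hpre.sparse hs
    have hcwB := hpre.K3t.sparse_codewords hs1
    have hclB := hpre.K3t.sparse_lengths hs1
    have hbw := cw_book_where hpre he_room
    have ecw : add_entry.cwCell t =
        ⟨Codebook.codewords u.mem (u.reg .rdi).toNat + 4 * usedCount u.mem (u.reg .rsi).toNat j, 4⟩ := by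
      show (⟨Codebook.codewords t.mem (t.reg .rdi).toNat + 4 * ((t.reg .rcx).toNat % 2 ^ 32), 4⟩ : Block) = _
      rw [h_rdi, h_rcx, hmn, hfld.codewords, Nat.mod_eq_of_lt (by omega)]
    have ecl : add_entry.lenCell t =
        ⟨Codebook.codeword_lengths u.mem (u.reg .rdi).toNat + usedCount u.mem (u.reg .rsi).toNat j, 1⟩ := by
      show (⟨Codebook.codeword_lengths t.mem (t.reg .rdi).toNat + (t.reg .rcx).toNat % 2 ^ 32, 1⟩ : Block) = _
      rw [h_rdi, h_rcx, hmn, hfld.codeword_lengths, Nat.mod_eq_of_lt (by omega)]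
    have evl : add_entry.valCell t = ⟨(u.reg .rcx).toNat + 4 * usedCount u.mem (u.reg .rsi).toNat j, 4⟩ := by
      show (⟨(t.reg .r9).toNat + 4 * ((t.reg .rcx).toNat % 2 ^ 32), 4⟩ : Block) = _
      rw [h_r9, h_rcx, hmn, Nat.mod_eq_of_lt (by omega)]
    rw [h_rdi, ecw, ecl, evl]
    -- the blocks are pairwise apart
    have hap := hpre.apartSparse hs
    have p1 := List.pairwise_cons.mp hap
    have p2 := List.pairwise_cons.mp p1.2
    have p3 := List.pairwise_cons.mp p2.2
    have p4 := List.pairwise_cons.mp p3.2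
    have d_book_cw := p1.1 (cwBlock u.mem (u.reg .rdi).toNat) (by simp only [List.mem_cons, true_or, or_true])
    have d_book_cl := p1.1 (clBlock u.mem (u.reg .rdi).toNat) (by simp only [List.mem_cons, true_or, or_true])
    have d_book_val := p1.1 ⟨(u.reg .rcx).toNat, 4 * (Codebook.sorted_entries u.mem (u.reg .rdi).toNat).toNat⟩
      (by simp only [List.mem_cons, true_or, or_true])
    have d_cw_cl := p3.1 (clBlock u.mem (u.reg .rdi).toNat) (by simp only [List.mem_cons, true_or, or_true])
    have d_cw_val := p3.1 ⟨(u.reg .rcx).toNat, 4 * (Codebook.sorted_entries u.mem (u.reg .rdi).toNat).toNat⟩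
      (by simp only [List.mem_cons, true_or, or_true])
    have d_cl_val := p4.1 ⟨(u.reg .rcx).toNat, 4 * (Codebook.sorted_entries u.mem (u.reg .rdi).toNat).toNat⟩
      (by simp only [List.mem_cons, true_or, or_true])
    simp only [cwBlock, clBlock, Codebook.N_sparse hs, Block.disjoint, Off.sizeof.Codebook] at d_book_cw d_book_cl d_book_val
    simp only [cwBlock, clBlock, Codebook.N_sparse hs, Block.disjoint] at d_cw_cl d_cw_val d_cl_val
    refine ⟨?_, ?_, ?_, ?_, ?_⟩
    · show (t.reg .rcx).toNat % 2 ^ 32 < 2 ^ 31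
      rw [h_rcx, hmn]
      omega
    · refine Site.of_blk hLive hcwB ?_ ?_ (by decide)
      · dsimp only
        omega
      · dsimp only
        omega
    · refine Site.of_blk hLive hclB ?_ ?_ (by decide)
      · dsimp only
        omega
      · dsimp only
        omega
    · refine Site.of_blk hLive hvals ?_ ?_ (by decide)
      · dsimp only
        omega
      · dsimp only
        omega
    · refine List.Pairwise.cons ?_ (List.Pairwise.cons ?_ (List.Pairwise.cons ?_ (List.Pairwise.cons ?_ List.Pairwise.nil)))
      · intro b hb
        simp only [List.mem_cons, List.not_mem_nil, or_false] at hb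
        rcases hb with e | e | e
        · rw [e]
          simp only [Block.disjoint, Off.sizeof.Codebook]
          omega
        · rw [e]
          simp only [Block.disjoint, Off.sizeof.Codebook]
          omega
        · rw [e]
          simp only [Block.disjoint, Off.sizeof.Codebook]
          omega
      · intro b hb
        simp only [List.mem_cons, List.not_mem_nil, or_false] at hb
        rcases hb with e | e
        · rw [e]
          simp only [Block.disjoint]
          omega
        · rw [e]
          simp only [Block.disjoint]
          omega
      · intro b hb
        simp only [List.mem_cons, List.not_mem_nil, or_false] at hb
        rw [hb]
        simp only [Block.disjoint]
        omega
      · intro b hb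
        exact absurd hb List.not_mem_nil

/-- **Where the data windows are**: every window of `cwWindows u` is an allocated block (K3t, the `values` block), so it lies below
the shadow and off the stack region below the entry's `rsp + 8`. (`1 ≤ n`, sparse `1 ≤ se`: a used entry exists.) -/
theorem cw_windows_where {others : List Obj} {frames : List (Nat × FrameLayout)} {Blk : Block → Prop} {u : State}
    (hpre : CodewordsPre others frames Blk u) (he_room : 7340032 + 400 ≤ (u.reg .rsp).toNat)
    (hn : 1 ≤ (u.reg .rdx).toNat % 2 ^ 32)
    (hse : Codebook.sparse u.mem (u.reg .rdi).toNat ≠ 0 → 1 ≤ (Codebook.sorted_entries u.mem (u.reg .rdi).toNat).toNat) :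
    ∀ w, w ∈ cwWindows u → w.hi ≤ 0xC00000 ∧
      ((u.reg .rsp).toNat + 8 ≤ w.lo ∨ w.hi ≤ 0x700000 ∨ 0x800000 ≤ w.lo) := by
  have hsh := hpre.shadow
  have hent := cw_entries_eq hpre
  intro w hw
  by_cases hs : Codebook.sparse u.mem (u.reg .rdi).toNat = 0
  · rw [cw_cwWindows_dense u hs] at hw
    have e := List.mem_singleton.mp hw
    have hB := (hpre.K3t.dense hs).codewords
    have hsize : 1 ≤ 4 * (Codebook.entries u.mem (u.reg .rdi).toNat).toNat := by
      omega
    have hwh := blk_where hpre.live hsh.inv hsh.offText (by omega) hB hsize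
    have hwh' : Codebook.codewords u.mem (u.reg .rdi).toNat + 4 * (Codebook.entries u.mem (u.reg .rdi).toNat).toNat ≤ 0xC00000 ∧
        ((u.reg .rsp).toNat + 8 ≤ Codebook.codewords u.mem (u.reg .rdi).toNat ∨
          Codebook.codewords u.mem (u.reg .rdi).toNat + 4 * (Codebook.entries u.mem (u.reg .rdi).toNat).toNat ≤ 0x700000 ∨
          0x800000 ≤ Codebook.codewords u.mem (u.reg .rdi).toNat) := ⟨hwh.2.1, hwh.2.2⟩
    rw [e]
    simp only [cwBlock, Codebook.N_dense hs, Block.span]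
    omega
  · have hs1 : Codebook.sparse u.mem (u.reg .rdi).toNat = 1 := by
      rcases hpre.K2.sparse_01 with h | h
      · exact absurd h hs
      · exact h
    have hse1 := hse hs
    rw [cw_cwWindows_sparse u hs] at hw
    simp only [List.mem_cons, List.not_mem_nil, or_false] at hw
    rcases hw with e | e | e
    · have hB := hpre.K3t.sparse_codewords hs1
      have hsize : 1 ≤ 4 * (Codebook.sorted_entries u.mem (u.reg .rdi).toNat).toNat := by
        omega
      have hwh := blk_where hpre.live hsh.inv hsh.offText (by omega) hB hsize
      have hwh' : Codebook.codewords u.mem (u.reg .rdi).toNat +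
            4 * (Codebook.sorted_entries u.mem (u.reg .rdi).toNat).toNat ≤ 0xC00000 ∧
          ((u.reg .rsp).toNat + 8 ≤ Codebook.codewords u.mem (u.reg .rdi).toNat ∨
            Codebook.codewords u.mem (u.reg .rdi).toNat +
              4 * (Codebook.sorted_entries u.mem (u.reg .rdi).toNat).toNat ≤ 0x700000 ∨
            0x800000 ≤ Codebook.codewords u.mem (u.reg .rdi).toNat) := ⟨hwh.2.1, hwh.2.2⟩
      rw [e]
      simp only [cwBlock, Codebook.N_sparse hs, Block.span]
      omega
    · have hB := hpre.K3t.sparse_lengths hs1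
      have hwh := blk_where hpre.live hsh.inv hsh.offText (by omega) hB hse1
      have hwh' : Codebook.codeword_lengths u.mem (u.reg .rdi).toNat +
            (Codebook.sorted_entries u.mem (u.reg .rdi).toNat).toNat ≤ 0xC00000 ∧
          ((u.reg .rsp).toNat + 8 ≤ Codebook.codeword_lengths u.mem (u.reg .rdi).toNat ∨
            Codebook.codeword_lengths u.mem (u.reg .rdi).toNat +
              (Codebook.sorted_entries u.mem (u.reg .rdi).toNat).toNat ≤ 0x700000 ∨
            0x800000 ≤ Codebook.codeword_lengths u.mem (u.reg .rdi).toNat) := ⟨hwh.2.1, hwh.2.2⟩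
      rw [e]
      simp only [clBlock, Codebook.N_sparse hs, Block.span]
      omega
    · have hB := (hpre.sparse hs).2
      have hsize : 1 ≤ 4 * (Codebook.sorted_entries u.mem (u.reg .rdi).toNat).toNat := by
        omega
      have hwh := blk_where hpre.live hsh.inv hsh.offText (by omega) hB hsize
      have hwh' : (u.reg .rcx).toNat + 4 * (Codebook.sorted_entries u.mem (u.reg .rdi).toNat).toNat ≤ 0xC00000 ∧
          ((u.reg .rsp).toNat + 8 ≤ (u.reg .rcx).toNat ∨
            (u.reg .rcx).toNat + 4 * (Codebook.sorted_entries u.mem (u.reg .rdi).toNat).toNat ≤ 0x700000 ∨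
            0x800000 ≤ (u.reg .rcx).toNat) := ⟨hwh.2.1, hwh.2.2⟩
      rw [e]
      dsimp only
      omega

/-- **What `add_entry` writes lies inside the data windows** `cwWindows u`: dense the word `codewords[j]`, `j < n`; sparse the three
cells with index `m = usedCount u.mem len j < se`. `t` is the state at add_entry's entry (as in `cw_add_entry_pre`). -/
theorem cw_writes_sub {others : List Obj} {frames fr : List (Nat × FrameLayout)} {Blk : Block → Prop} {u t : State}
    (hpre : CodewordsPre others frames Blk u) (he_room : 7340032 + 400 ≤ (u.reg .rsp).toNat)
    (he_top : (u.reg .rsp).toNat + 8 ≤ 8388608)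
    (hsame : Mem.SameExcept (⟨(u.reg .rsp).toNat - 400, (u.reg .rsp).toNat⟩ ::
      ⟨0xC00000 + ((u.reg .rsp).toNat - 248) / 8, 0xC00000 + ((u.reg .rsp).toNat - 248) / 8 + 24⟩ :: cwWindows u) u.mem t.mem)
    (h_rdi : t.reg .rdi = u.reg .rdi) (h_r9 : t.reg .r9 = u.reg .rcx)
    {j : Nat} (h_rdx : t.reg .rdx = Word.ofBV (BitVec.ofNat 32 j))
    (h_rcx : t.reg .rcx = Word.ofBV (BitVec.ofNat 32 (usedCount u.mem (u.reg .rsi).toNat j)))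
    (hj : j < (u.reg .rdx).toNat % 2 ^ 32) (hused : u.mem.u8 ((u.reg .rsi).toNat + j) ≠ 255) :
    ∀ w, w ∈ (add_entry.spec others fr).writes t → ∃ w', w' ∈ cwWindows u ∧ w'.lo ≤ w.lo ∧ w.hi ≤ w'.hi := by
  have hn24 := cw_n_lt hpre
  have hent := cw_entries_eq hpre
  have hfld := cw_fields_kept hpre he_room he_top hsame
  have hjn : (Word.ofBV (BitVec.ofNat 32 j)).toNat = j := cw_cnt_toNat j (by omega)
  have hm_le := usedCount_le u.mem (u.reg .rsi).toNat j
  have hmn : (Word.ofBV (BitVec.ofNat 32 (usedCount u.mem (u.reg .rsi).toNat j))).toNat =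
      usedCount u.mem (u.reg .rsi).toNat j := cw_cnt_toNat _ (by omega)
  intro w hw
  by_cases hs : Codebook.sparse u.mem (u.reg .rdi).toNat = 0
  · have hst : Codebook.sparse t.mem (t.reg .rdi).toNat = 0 := by
      rw [h_rdi, hfld.sparse]
      exact hs
    rw [add_entry.spec_writes_dense others fr t hst] at hw
    have e := List.mem_singleton.mp hw
    refine ⟨(cwBlock u.mem (u.reg .rdi).toNat).span, ?_, ?_⟩
    · rw [cw_cwWindows_dense u hs]
      exact List.mem_singleton.mpr rfl
    · rw [e]
      simp only [add_entry.denseCell, cwBlock, Codebook.N_dense hs, Block.span, argU32, h_rdi, h_rdx, hjn, hfld.codewords]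
      omega
  · have hst : Codebook.sparse t.mem (t.reg .rdi).toNat ≠ 0 := by
      rw [h_rdi, hfld.sparse]
      exact hs
    have hlt := cw_used_lt hpre hs hj hused
    rw [add_entry.spec_writes_sparse others fr t hst] at hw
    simp only [List.mem_cons, List.not_mem_nil, or_false] at hw
    rcases hw with e | e | e
    · refine ⟨(cwBlock u.mem (u.reg .rdi).toNat).span, ?_, ?_⟩
      · rw [cw_cwWindows_sparse u hs]
        simp only [List.mem_cons, true_or]
      · rw [e]
        simp only [add_entry.cwCell, cwBlock, Codebook.N_sparse hs, Block.span, argU32, h_rdi, h_rcx, hmn, hfld.codewords]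
        omega
    · refine ⟨(clBlock u.mem (u.reg .rdi).toNat).span, ?_, ?_⟩
      · rw [cw_cwWindows_sparse u hs]
        simp only [List.mem_cons, true_or, or_true]
      · rw [e]
        simp only [add_entry.lenCell, clBlock, Codebook.N_sparse hs, Block.span, argU32, h_rdi, h_rcx, hmn,
          hfld.codeword_lengths]
        omega
    · refine ⟨⟨(u.reg .rcx).toNat, (u.reg .rcx).toNat + 4 * (Codebook.sorted_entries u.mem (u.reg .rdi).toNat).toNat⟩, ?_, ?_⟩
      · rw [cw_cwWindows_sparse u hs]
        simp only [List.mem_cons, true_or, or_true]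
      · rw [e]
        simp only [add_entry.valCell, Block.span, argU32, h_r9, h_rcx, hmn]
        omega

/-! ### PART 3. The claims of the nine segments -/

/-- **Segment 1, 0x1081a0 – 0x108213** (lines 1123 – 1127: the prologue with its two shadow stores, `memset(available, 0, 128)`):
from the entry to `cut1`. -/
def Seg1 (Lay : Layout) (μ : Microarch) (u₀ : State) : Prop :=
  ∀ (others : List Obj) (frames : List (Nat × FrameLayout)) (Blk : Block → Prop) (u : State) (ret : Word),
    AtEntry (conv u₀) L.compute_codewords.entry (compute_codewords.spec others frames Blk).frame ret u →
    (compute_codewords.spec others frames Blk).pre u →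
    ReachVia Lay μ WayInv u (fun s => At1 others frames Blk u₀ u ret s)

/-- **Segment 2, 0x108218 – 0x108254 + 0x1083dd – 0x1083e2 + 0x1083b3 – 0x1083dc** (lines 1129 – 1130: loop 1120 with its check of
`len[k]`; `k == n`: `return TRUE` through the epilogue): from `cut1` to the check of the first used entry, or to the `ret`. -/
def Seg2 (Lay : Layout) (μ : Microarch) (u₀ : State) : Prop :=
  ∀ (others : List Obj) (frames : List (Nat × FrameLayout)) (Blk : Block → Prop) (u : State) (ret : Word) (v : State),
    At1 others frames Blk u₀ u ret v →
    ReachVia Lay μ WayInv v (fun s =>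
      (∃ k : Nat, AtFirst others frames Blk u₀ u ret k s) ∨
      Returned (conv u₀) (compute_codewords.spec others frames Blk) u ret s)

/-- **Segment 3, 0x108257 – 0x108277** (line 1133: the check of `len[k]`, `add_entry(c, 0, k, 0, len[k], values)`): from `chk2` to
`cut3`. `AddEntryPre` from K3t (dense: `codewords[k]`, `k < n = entries`; sparse: count `0 < se` by `usedCount_lt` and CNT). -/
def Seg3 (Lay : Layout) (μ : Microarch) (u₀ : State) : Prop :=
  ∀ (others : List Obj) (frames : List (Nat × FrameLayout)) (Blk : Block → Prop) (u : State) (ret : Word) (k : Nat) (v : State),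
    AtFirst others frames Blk u₀ u ret k v →
    ReachVia Lay μ WayInv v (fun s => At3 others frames Blk u₀ u ret k s)

/-- **Segment 4, 0x10827c – 0x1082bd** (lines 1135 – 1136: loop 1126 `available[i] = 1U << (32 − i)`, `1 ≤ i ≤ len[k]`, with its check;
`i = k + 1`, `m = 1`, the shadow index saved): from `cut3` to the head of the main loop with index `k + 1`. -/
def Seg4 (Lay : Layout) (μ : Microarch) (u₀ : State) : Prop :=
  ∀ (others : List Obj) (frames : List (Nat × FrameLayout)) (Blk : Block → Prop) (u : State) (ret : Word) (k : Nat) (v : State),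
    At3 others frames Blk u₀ u ret k v →
    ReachVia Lay μ WayInv v (fun s => AtMain others frames Blk u₀ u ret (k + 1) s)

/-- **Segment 5, 0x108345 – 0x108359 + 0x1083a9 – 0x1083dc** (line 1141 `i < n`; line 1165 `return TRUE` through the epilogue): from the
head of the main loop to the check of `len[i]`, or to the `ret` (`i = n`: `m = usedCount n = se` by CNT gives VAL). -/
def Seg5 (Lay : Layout) (μ : Microarch) (u₀ : State) : Prop :=
  ∀ (others : List Obj) (frames : List (Nat × FrameLayout)) (Blk : Block → Prop) (u : State) (ret : Word) (i : Nat) (v : State),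
    AtMain others frames Blk u₀ u ret i v →
    ReachVia Lay μ WayInv v (fun s =>
      AtLen others frames Blk u₀ u ret i s ∨
      Returned (conv u₀) (compute_codewords.spec others frames Blk) u ret s)

/-- **Segment 6, 0x10835c – 0x108371 + 0x108341** (lines 1143 – 1144: the check of `len[i]`, `z = len[i]`, `if (z == NO_CODE) continue;`
with the `++i` of the back edge): from `chk6` to the head of the main loop with index `i + 1` (`len[i] = 255`: `m` unchanged), or
to the head of loop 1143. -/
def Seg6 (Lay : Layout) (μ : Microarch) (u₀ : State) : Prop :=
  ∀ (others : List Obj) (frames : List (Nat × FrameLayout)) (Blk : Block → Prop) (u : State) (ret : Word) (i : Nat) (v : State),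
    AtLen others frames Blk u₀ u ret i v →
    ReachVia Lay μ WayInv v (fun s =>
      AtMain others frames Blk u₀ u ret (i + 1) s ∨
      AtScan others frames Blk u₀ u ret i s)

/-- **Segment 7, 0x1082c5 – 0x1082e9 + 0x1082c2 + 0x1083e4 – 0x1083e9 + 0x1083b3 – 0x1083dc** (lines 1152 – 1153: loop 1143 with its
check of `available[z]`; `z == 0`: `return FALSE` through the epilogue): from the head of loop 1143 to the check of
`available[z]`, or to the `ret`. -/
def Seg7 (Lay : Layout) (μ : Microarch) (u₀ : State) : Prop :=
  ∀ (others : List Obj) (frames : List (Nat × FrameLayout)) (Blk : Block → Prop) (u : State) (ret : Word) (i : Nat) (v : State),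
    AtScan others frames Blk u₀ u ret i v →
    ReachVia Lay μ WayInv v (fun s =>
      (∃ z : Nat, AtRes others frames Blk u₀ u ret i z s) ∨
      Returned (conv u₀) (compute_codewords.spec others frames Blk) u ret s)

/-- **Segment 8, 0x1082ee – 0x108341** (lines 1154 – 1158: the check of `available[z]`, `res = available[z]; available[z] = 0;`,
`add_entry(c, bit_reverse(res), i, m++, len[i], values)`, `if (z != len[i])`): from `chk5` to the head of the main loop with index
`i + 1` (`z = len[i]`), or to the head of loop 1150. `AddEntryPre`: `m < se` by `usedCount_lt` and CNT. -/
def Seg8 (Lay : Layout) (μ : Microarch) (u₀ : State) : Prop :=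
  ∀ (others : List Obj) (frames : List (Nat × FrameLayout)) (Blk : Block → Prop) (u : State) (ret : Word) (i z : Nat) (v : State),
    AtRes others frames Blk u₀ u ret i z v →
    ReachVia Lay μ WayInv v (fun s =>
      AtMain others frames Blk u₀ u ret (i + 1) s ∨
      AtProp others frames Blk u₀ u ret i z s)

/-- **Segment 9, 0x108373 – 0x1083a7 + 0x108341** (lines 1159 – 1162: loop 1150 `available[y] = res + (1 << (32 − y))`, `z < y ≤
len[i]`, with its check; `m + 1` reloaded, the `++i` of the back edge): from the head of loop 1150 to the head of the main loop
with index `i + 1`. -/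
def Seg9 (Lay : Layout) (μ : Microarch) (u₀ : State) : Prop :=
  ∀ (others : List Obj) (frames : List (Nat × FrameLayout)) (Blk : Block → Prop) (u : State) (ret : Word) (i z : Nat) (v : State),
    AtProp others frames Blk u₀ u ret i z v →
    ReachVia Lay μ WayInv v (fun s => AtMain others frames Blk u₀ u ret (i + 1) s)

end Vorbis.Spec.compute_codewords
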